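-- pv_equiv track=rewrite | github.com/tomer-reiter/advent-of-code | 2023/puzzle_3.py | solve
-- ===== SOURCE A (Python) =====
-- def get_symbol_map(input_list):
--     symbol_map = dict()
--     symbols = set()
--     for i in range(len(input_list)):
--         line = input_list[i]
--         for j in range(len(line)):
--             char = line[j]
--             if char != "." and not char.isnumeric():
--                 symbol_map[(i, j)] = []
--                 symbols.add(char)
--     return symbol_map
--
-- def solve(input_list):
--     p1 = 0
--     p2 = 0
--     symbol_map = get_symbol_map(input_list)
--     for i in range(len(input_list)):
--         line = input_list[i]
--         start = -2
--         end = -2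
--         number = ""
--         for j in range(len(line)):
--             char = line[j]
--             if char.isnumeric():
--                 if number != "":
--                     end = j
--                     number += char
--                 else:
--                     start = j
--                     end = j
--                     number += char
--             if (not char.isnumeric() or j == len(line) - 1) and number != "":
--                 symbol_found = False
--                 for i1 in range(i-1, i+2):
--                     for j1 in range(start-1, end+2):
--                         if (i1, j1) in symbol_map:
--                             symbol_found = True
--                             symbol_map[(i1, j1)] = symbol_map[(i1,j1)] + [int(number)]
--                 if symbol_found:
--                     p1 += int(number)
--                 number = ""
--     for symbol, nums in symbol_map.items():
--         if input_list[symbol[0]][symbol[1]] == "*" and len(nums) == 2: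
--             p2 += nums[0] * nums[1]
--     return p1, p2
-- ===== SOURCE B (Python) =====
-- def solve(input_list):
--     # pass 1: index every digit cell by the token (maximal digit run) covering it
--     cell_tok = {}
--     for i, line in enumerate(input_list):
--         n = len(line)
--         j = 0
--         while j < n:
--             if line[j].isnumeric():
--                 k = j
--                 while k < n and line[k].isnumeric():
--                     k += 1
--                 v = int(line[j:k])
--                 for c in range(j, k):
--                     cell_tok[(i, c)] = ((i, j), v)
--                 j = k
--             else:
--                 j += 1
--     # pass 2: symbol-centric scan — only symbol cells look at their 8 neighbours
--     p1 = 0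
--     p2 = 0
--     seen = set()
--     for i, line in enumerate(input_list):
--         for j, ch in enumerate(line):
--             if ch != "." and not ch.isnumeric():
--                 ids = []
--                 for di in (-1, 0, 1):
--                     for dj in (-1, 0, 1):
--                         t = cell_tok.get((i + di, j + dj))
--                         if t is not None and all(t[0] != u[0] for u in ids):
--                             ids.append(t)
--                 for tid, v in ids:
--                     if tid not in seen:
--                         seen.add(tid)
--                         p1 += v
--                 if ch == "*" and len(ids) == 2:
--                     p2 += ids[0][1] * ids[1][1]
--     return p1, p2
-- ===== Notes on version B (the rewrite author's own statement) =====
-- stated objective: alternative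
-- what changed: A is number-centric: it tokenizes each row char-by-char with start/end sentinels and, for every number, scans that number's whole neighbourhood rectangle against a precomputed symbol dict, appending the value to each touched symbol cell; B inverts the traversal: a first pass builds an index mapping every digit cell to its covering number token (positional id, value), then only symbol cells are visited, each gathering the distinct tokens among its 8 neighbours from the index - p1 via a global first-seen id set, p2 directly at '*' cells with exactly two distinct neighbour tokens.
import Mathlib
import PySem

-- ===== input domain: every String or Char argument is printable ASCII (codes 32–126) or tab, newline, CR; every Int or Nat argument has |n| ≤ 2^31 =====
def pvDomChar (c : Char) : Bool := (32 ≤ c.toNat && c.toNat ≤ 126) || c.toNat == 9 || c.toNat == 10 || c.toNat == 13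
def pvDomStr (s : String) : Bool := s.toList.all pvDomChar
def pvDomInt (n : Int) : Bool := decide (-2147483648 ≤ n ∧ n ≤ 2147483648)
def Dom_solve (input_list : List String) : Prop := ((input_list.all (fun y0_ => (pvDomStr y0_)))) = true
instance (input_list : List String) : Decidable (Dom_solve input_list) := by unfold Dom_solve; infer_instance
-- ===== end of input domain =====

-- A is number-centric (tokenize rows, scan each number's neighbourhood against a symbol dict);
-- B is symbol-centric (index digit cells by covering number token once, then only symbol cells
-- inspect their 8 neighbours): objective 'alternative' — same asymptotic cost, inverted traversal.
-- Python's str.isnumeric is ported as PySem.Chars.isdigit, exact on the ASCII input domain.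

-- ===== PORT A =====
abbrev SymMap := PySem.Dict (Int × Int) (List Int)

-- state of A's inner loop: (p1, symbol_map, start, end, number)
abbrev AState := Int × SymMap × Int × Int × List Char

def getSymbolMap (input_list : List String) : SymMap × PySem.Set Char :=
  (PySem.List.pyRange 0 (PySem.List.len input_list) 1).foldl (fun st i =>
    let line := (PySem.List.pyGetD input_list i "").toList
    (PySem.List.pyRange 0 (PySem.List.len line) 1).foldl (fun st j =>
      let char := PySem.List.pyGetD line j ' '
      if char != '.' && !(PySem.Chars.isdigit char) then
        (st.1.insert (i, j) [], PySem.Set.add st.2 char)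
      else st) st) (PySem.Dict.empty, PySem.Set.empty)

-- the 'if symbol_found'-building double loop of A (started with symbol_found = False)
def pvFlushA (symbol_map : SymMap) (i start endv v : Int) : Bool × SymMap :=
  (PySem.List.pyRange (i-1) (i+2) 1).foldl (fun st i1 =>
    (PySem.List.pyRange (start-1) (endv+2) 1).foldl (fun st j1 =>
      if st.2.contains (i1, j1) then
        (true, st.2.insert (i1, j1) (st.2.getD (i1, j1) [] ++ [v]))
      else st) st) (false, symbol_map)

-- body of A's inner 'for j in range(len(line))' loop
def pvBodyA (line : List Char) (i : Int) (s : AState) (j : Int) : AState :=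
  match s with
  | (p1, m, start, endv, number) =>
    let char := PySem.List.pyGetD line j ' '
    let t : Int × Int × List Char :=
      if PySem.Chars.isdigit char then
        if number ≠ [] then (start, j, number ++ [char])
        else (j, j, number ++ [char])
      else (start, endv, number)
    match t with
    | (start, endv, number) =>
      if (!(PySem.Chars.isdigit char) || j == PySem.List.len line - 1) && number ≠ [] then
        let v := (PySem.Int.ofChars? number).getD 0
        let r := pvFlushA m i start endv v
        (if r.1 then p1 + v else p1, r.2, start, endv, [])
      else (p1, m, start, endv, number)

def solve (input_list : List String) : Int × Int :=
  let symbol_map := (getSymbolMap input_list).1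
  let r := (PySem.List.pyRange 0 (PySem.List.len input_list) 1).foldl
    (fun (st : Int × SymMap) i =>
      let line := (PySem.List.pyGetD input_list i "").toList
      let r := (PySem.List.pyRange 0 (PySem.List.len line) 1).foldl (pvBodyA line i)
        (st.1, st.2, -2, -2, [])
      (r.1, r.2.1)) (0, symbol_map)
  let p2 := r.2.items.foldl (fun p2 kv =>
      if PySem.List.pyGetD (PySem.List.pyGetD input_list kv.1.1 "").toList kv.1.2 ' ' == '*'
          && PySem.List.len kv.2 == 2 then
        p2 + PySem.List.pyGetD kv.2 0 0 * PySem.List.pyGetD kv.2 1 0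
      else p2) 0
  (r.1, p2)

-- ===== PORT B =====
abbrev CellTok := PySem.Dict (Int × Int) ((Int × Int) × Int)

-- 'while k < n and line[k].isnumeric(): k += 1'
def pvRunEnd (row : List Char) (k : Nat) : Nat :=
  if h : k < row.length then
    if PySem.Chars.isdigit row[k] then pvRunEnd row (k+1) else k
  else k
termination_by row.length - k
decreasing_by omega

theorem pvRunEnd_ge (row : List Char) (k : Nat) : k ≤ pvRunEnd row k := by
  unfold pvRunEnd
  split
  · split
    · exact Nat.le_trans (Nat.le_succ k) (pvRunEnd_ge row (k+1))
    · exact Nat.le_refl k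
  · exact Nat.le_refl k
termination_by row.length - k
decreasing_by omega

theorem pvRunEnd_gt (row : List Char) (k : Nat) (hk : k < row.length)
    (hd : PySem.Chars.isdigit row[k]) : k < pvRunEnd row k := by
  unfold pvRunEnd
  rw [dif_pos hk, if_pos hd]
  exact Nat.lt_of_lt_of_le (Nat.lt_succ_self k) (pvRunEnd_ge row (k+1))

-- pass 1 of B: B's 'while j < n' row scan filling the digit-cell → token index
def pvIndexRow (i : Int) (row : List Char) (j : Nat) (d : CellTok) : CellTok :=
  if h : j < row.length then
    if hd : PySem.Chars.isdigit row[j] then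
      let k := pvRunEnd row j
      let v := (PySem.Int.ofChars? (PySem.List.slice row (some (j : Int)) (some (k : Int)))).getD 0
      pvIndexRow i row k
        ((PySem.List.pyRange (j : Int) (k : Int) 1).foldl
          (fun d c => d.insert (i, c) ((i, (j : Int)), v)) d)
    else pvIndexRow i row (j+1) d
  else d
termination_by row.length - j
decreasing_by
  · have := pvRunEnd_gt row j h hd; omega
  · omega

-- B's neighbour gathering at a symbol cell: distinct (id, value) tokens among the 8 neighbours
def pvNbrIds (ct : CellTok) (i j : Int) : List ((Int × Int) × Int) :=
  ([-1, 0, 1] : List Int).foldl (fun ids di =>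
    ([-1, 0, 1] : List Int).foldl (fun ids dj =>
      match ct.get? (i + di, j + dj) with
      | some t => if ids.all (fun u => t.1 != u.1) then ids ++ [t] else ids
      | none => ids) ids) []

-- B's body at a symbol cell: fold new ids into (p1, seen), then the '*' check for p2
def pvSymBody (ct : CellTok) (i j : Int) (ch : Char) (st : Int × Int × PySem.Set (Int × Int)) :
    Int × Int × PySem.Set (Int × Int) :=
  let ids := pvNbrIds ct i j
  let st1 := ids.foldl (fun (st : Int × Int × PySem.Set (Int × Int)) t =>
      if PySem.Set.contains st.2.2 t.1 then st
      else (st.1 + t.2, st.2.1, PySem.Set.add st.2.2 t.1)) st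
  if ch == '*' && PySem.List.len ids == 2 then
    (st1.1, st1.2.1 + (PySem.List.pyGetD ids 0 ((0, 0), 0)).2
        * (PySem.List.pyGetD ids 1 ((0, 0), 0)).2, st1.2.2)
  else st1

def solve_alt (input_list : List String) : Int × Int :=
  let ct := (PySem.List.enumerate input_list).foldl
      (fun d p => pvIndexRow p.1 p.2.toList 0 d) PySem.Dict.empty
  let r := (PySem.List.enumerate input_list).foldl
      (fun (st : Int × Int × PySem.Set (Int × Int)) p =>
        (PySem.List.enumerate p.2.toList).foldl (fun st q =>
          if q.2 != '.' && !(PySem.Chars.isdigit q.2) then pvSymBody ct p.1 q.1 q.2 st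
          else st) st) (0, 0, PySem.Set.empty)
  (r.1, r.2.1)

-- ===== PRECONDITION & SPEC =====
def Spec_solve (input_list : List String) (out : Int × Int) : Prop := out = solve_alt input_list
instance (input_list : List String) (out : Int × Int) : Decidable (Spec_solve input_list out) := by unfold Spec_solve; infer_instance

-- ===== CLAIM (what is proved, stated in full; the proofs are below) =====
def Claim_equal_solve : Prop := ∀ (input_list : List String), Dom_solve input_list → Spec_solve input_list (solve input_list)

-- ===== LEMMAS AND PROOFS =====

-- ---------- spec-level vocabulary ----------
def rowOf (g : List String) (i : Int) : List Char := (PySem.List.pyGetD g i "").toList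

def symB (c : Char) : Bool := c != '.' && !(PySem.Chars.isdigit c)

theorem symB_def (c : Char) : (c != '.' && !(PySem.Chars.isdigit c)) = symB c := rfl

def symAt (g : List String) (i j : Int) : Bool :=
  decide (0 ≤ i) && decide (i < PySem.List.len g) && decide (0 ≤ j) &&
    decide (j < PySem.List.len (rowOf g i)) && symB (PySem.List.pyGetD (rowOf g i) j ' ')

def starAt (g : List String) (i j : Int) : Bool :=
  decide (0 ≤ i) && decide (i < PySem.List.len g) && decide (0 ≤ j) &&
    decide (j < PySem.List.len (rowOf g i)) && (PySem.List.pyGetD (rowOf g i) j ' ' == '*')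

theorem symAt_iff (g : List String) (i j : Int) :
    symAt g i j = true ↔ 0 ≤ i ∧ i < PySem.List.len g ∧ 0 ≤ j ∧
      j < PySem.List.len (rowOf g i) ∧ symB (PySem.List.pyGetD (rowOf g i) j ' ') = true := by
  unfold symAt
  simp [Bool.and_eq_true, and_assoc]

theorem starAt_iff (g : List String) (i j : Int) :
    starAt g i j = true ↔ 0 ≤ i ∧ i < PySem.List.len g ∧ 0 ≤ j ∧
      j < PySem.List.len (rowOf g i) ∧ PySem.List.pyGetD (rowOf g i) j ' ' = '*' := by
  unfold starAt
  simp [Bool.and_eq_true, and_assoc]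

def cellsZ (g : List String) : List (Int × Int) :=
  (PySem.List.pyRange 0 (PySem.List.len g) 1).flatMap (fun i =>
    (PySem.List.pyRange 0 (PySem.List.len (rowOf g i)) 1).map (fun j => (i, j)))

def symCells (g : List String) : List (Int × Int) :=
  (cellsZ g).filter (fun q => symAt g q.1 q.2)

def numChars (row : List Char) (s e : Nat) : List Char := (row.drop s).take (e - s)

def valTok (row : List Char) (s e : Nat) : Int := (PySem.Int.ofChars? (numChars row s e)).getD 0

def tokensFrom (row : List Char) (j : Nat) : List (Nat × Nat) :=
  if h : j < row.length then
    if PySem.Chars.isdigit row[j] then (j, pvRunEnd row j) :: tokensFrom row (pvRunEnd row j)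
    else tokensFrom row (j+1)
  else []
termination_by row.length - j
decreasing_by
  · have := pvRunEnd_gt row j h (by assumption); omega
  · omega

-- a token: (row index, start, end-exclusive)
abbrev Tok := Int × Nat × Nat

def tokVal (g : List String) (t : Tok) : Int := valTok (rowOf g t.1) t.2.1 t.2.2

def idOf (t : Tok) : Int × Int := (t.1, (t.2.1 : Int))

def allToks (g : List String) : List Tok :=
  (PySem.List.pyRange 0 (PySem.List.len g) 1).flatMap (fun i =>
    (tokensFrom (rowOf g i) 0).map (fun t => (i, t)))

def inRectB (q : Int × Int) (t : Tok) : Bool :=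
  decide (t.1 - 1 ≤ q.1) && decide (q.1 ≤ t.1 + 1) &&
    decide ((t.2.1 : Int) - 1 ≤ q.2) && decide (q.2 ≤ (t.2.2 : Int))

def adjToks (g : List String) (q : Int × Int) : List Tok := (allToks g).filter (inRectB q)

def rect (i a b : Int) : List (Int × Int) :=
  (PySem.List.pyRange (i-1) (i+2) 1).flatMap (fun i1 =>
    (PySem.List.pyRange a b 1).map (fun j1 => (i1, j1)))

def hitSym (g : List String) (t : Tok) : Bool :=
  (rect t.1 ((t.2.1 : Int) - 1) ((t.2.2 : Int) + 1)).any (fun q => symAt g q.1 q.2)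

def gTerm (g : List String) (q : Int × Int) : Int :=
  if starAt g q.1 q.2 && ((adjToks g q).length == 2) then
    ((adjToks g q).map (tokVal g)).prod
  else 0

def stepTokenA (row : List Char) (i : Int) (st : Int × SymMap) (t : Nat × Nat) : Int × SymMap :=
  (if (pvFlushA st.2 i (t.1 : Int) ((t.2 : Int) - 1) (valTok row t.1 t.2)).1
     then st.1 + valTok row t.1 t.2 else st.1,
   (pvFlushA st.2 i (t.1 : Int) ((t.2 : Int) - 1) (valTok row t.1 t.2)).2)

def cellA (v : Int) (st : Bool × SymMap) (c : Int × Int) : Bool × SymMap :=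
  if st.2.contains c then (true, st.2.insert c (st.2.getD c [] ++ [v])) else st

-- ---------- generic list facts ----------
theorem sum_map_filter_eq {a : Type} (l : List a) (p : a → Bool) (f : a → Int) :
    ((l.filter p).map f).sum = (l.map (fun x => if p x then f x else 0)).sum := by
  induction l with
  | nil => rfl
  | cons x xs ih =>
    by_cases h : p x <;> simp [h, ih]

theorem filter_flatMap' {a b : Type} (l : List a) (f : a → List b) (p : b → Bool) :
    (l.flatMap f).filter p = l.flatMap (fun x => (f x).filter p) := by
  induction l with
  | nil => rfl
  | cons x xs ih => simp [List.filter_append, ih]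

theorem nodup_pairs_flatMap {β : Type} (is : List Int) (cols : Int → List β) (hnd : is.Nodup)
    (hc : ∀ i, (cols i).Nodup) :
    (is.flatMap (fun i => (cols i).map (fun j => (i, j)))).Nodup := by
  induction is with
  | nil => simp
  | cons i is ih =>
    rw [List.flatMap_cons]
    apply List.Nodup.append
    · exact (hc i).map (fun a b h => by simpa using congrArg Prod.snd h)
    · exact ih (List.nodup_cons.mp hnd).2
    · intro a ha hb
      rw [List.mem_map] at ha
      obtain ⟨j, _, rfl⟩ := ha
      rw [List.mem_flatMap] at hb
      obtain ⟨i', hi', hmem⟩ := hb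
      rw [List.mem_map] at hmem
      obtain ⟨j', _, hj'⟩ := hmem
      have : i' = i := by simpa using congrArg Prod.fst hj'
      subst this
      exact (List.nodup_cons.mp hnd).1 hi'

theorem flatMap_congr_mem {a b : Type} (l : List a) (f f' : a → List b)
    (h : ∀ x ∈ l, f x = f' x) : l.flatMap f = l.flatMap f' := by
  induction l with
  | nil => rfl
  | cons x xs ih =>
    simp only [List.flatMap_cons]
    rw [h x (List.mem_cons_self ..), ih (fun y hy => h y (List.mem_cons_of_mem _ hy))]

theorem find?_unique {a : Type} (l : List a) (p : a → Bool) (t : a) (ht : t ∈ l)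
    (hp : p t = true) (hu : ∀ u ∈ l, p u = true → u = t) : l.find? p = some t := by
  induction l with
  | nil => cases ht
  | cons x xs ih =>
    by_cases hx : p x = true
    · rw [List.find?_cons_of_pos hx, hu x (List.mem_cons_self ..) hx]
    · rw [List.find?_cons_of_neg (by simpa using hx)]
      rcases List.mem_cons.mp ht with rfl | ht'
      · exact absurd hp hx
      · exact ih ht' (fun u hu' hpu => hu u (List.mem_cons_of_mem _ hu') hpu)

-- ---------- pvRunEnd / tokensFrom facts ----------
theorem getD_eq_getElem' (row : List Char) (j : Nat) (h : j < row.length) :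
    row.getD j ' ' = row[j] := by
  rw [List.getD_eq_getElem?_getD, List.getElem?_eq_getElem h]
  rfl

theorem pvRunEnd_le (row : List Char) (k : Nat) (h : k ≤ row.length) :
    pvRunEnd row k ≤ row.length := by
  unfold pvRunEnd
  split
  · split
    · exact pvRunEnd_le row (k+1) (by omega)
    · exact h
  · exact h
termination_by row.length - k
decreasing_by omega

theorem pvRunEnd_digits (row : List Char) (k : Nat) :
    ∀ x, k ≤ x → x < pvRunEnd row k → PySem.Chars.isdigit (row.getD x ' ') = true := by
  intro x hkx hx
  unfold pvRunEnd at hx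
  by_cases h : k < row.length
  · rw [dif_pos h] at hx
    by_cases hd : PySem.Chars.isdigit row[k]
    · rw [if_pos hd] at hx
      rcases Nat.lt_or_ge k x with hlt | hge
      · exact pvRunEnd_digits row (k+1) x hlt hx
      · have hxk : x = k := by omega
        subst hxk
        rw [getD_eq_getElem' row x h]
        exact hd
    · rw [if_neg hd] at hx; omega
  · rw [dif_neg h] at hx; omega
termination_by row.length - k
decreasing_by omega

theorem pvRunEnd_stop (row : List Char) (k : Nat) (h : k ≤ row.length) :
    pvRunEnd row k = row.length ∨
      (pvRunEnd row k < row.length ∧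
        PySem.Chars.isdigit (row.getD (pvRunEnd row k) ' ') = false) := by
  unfold pvRunEnd
  split
  · split
    · exact pvRunEnd_stop row (k+1) (by omega)
    · right
      rename_i h1 h2
      refine ⟨h1, ?_⟩
      rw [getD_eq_getElem' row k h1]
      simpa using h2
  · left; omega
termination_by row.length - k
decreasing_by omega

theorem tokensFrom_stop (row : List Char) (j : Nat) (h : row.length ≤ j) :
    tokensFrom row j = [] := by
  rw [tokensFrom, dif_neg (by omega)]

theorem tokensFrom_skip (row : List Char) (j : Nat) (h : j < row.length)
    (hd : PySem.Chars.isdigit row[j] = false) : tokensFrom row j = tokensFrom row (j+1) := by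
  conv_lhs => rw [tokensFrom]
  rw [dif_pos h, if_neg (by simp [hd])]

theorem tokensFrom_run (row : List Char) (j : Nat) (h : j < row.length)
    (hd : PySem.Chars.isdigit row[j] = true) :
    tokensFrom row j = (j, pvRunEnd row j) :: tokensFrom row (pvRunEnd row j) := by
  conv_lhs => rw [tokensFrom]
  rw [dif_pos h, if_pos hd]

theorem tokensFrom_bounds (row : List Char) (j : Nat) :
    ∀ t ∈ tokensFrom row j, j ≤ t.1 ∧ t.1 < t.2 ∧ t.2 ≤ row.length := by
  intro t ht
  rw [tokensFrom] at ht
  by_cases h : j < row.length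
  · rw [dif_pos h] at ht
    by_cases hd : PySem.Chars.isdigit row[j] = true
    · rw [if_pos hd] at ht
      rcases List.mem_cons.mp ht with rfl | ht'
      · exact ⟨le_refl _, pvRunEnd_gt row j h hd, pvRunEnd_le row j (by omega)⟩
      · have h2 := pvRunEnd_gt row j h hd
        have h3 := tokensFrom_bounds row (pvRunEnd row j) t ht'
        exact ⟨by omega, h3.2⟩
    · rw [if_neg hd] at ht
      have h3 := tokensFrom_bounds row (j+1) t ht
      exact ⟨by omega, h3.2⟩
  · rw [dif_neg h] at ht
    cases ht
termination_by row.length - j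
decreasing_by
  · have := pvRunEnd_gt row j h hd; omega
  · omega

theorem tokensFrom_cells_digit (row : List Char) (j : Nat) :
    ∀ t ∈ tokensFrom row j, ∀ x, t.1 ≤ x → x < t.2 →
      PySem.Chars.isdigit (row.getD x ' ') = true := by
  intro t ht x h1 h2
  rw [tokensFrom] at ht
  by_cases h : j < row.length
  · rw [dif_pos h] at ht
    by_cases hd : PySem.Chars.isdigit row[j] = true
    · rw [if_pos hd] at ht
      rcases List.mem_cons.mp ht with rfl | ht'
      · exact pvRunEnd_digits row j x h1 h2
      · exact tokensFrom_cells_digit row (pvRunEnd row j) t ht' x h1 h2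
    · rw [if_neg hd] at ht
      exact tokensFrom_cells_digit row (j+1) t ht x h1 h2
  · rw [dif_neg h] at ht
    cases ht
termination_by row.length - j
decreasing_by
  · have := pvRunEnd_gt row j h hd; omega
  · omega

theorem tokensFrom_cover (row : List Char) (j : Nat) (x : Nat) (hjx : j ≤ x)
    (hx : x < row.length) (hd : PySem.Chars.isdigit (row.getD x ' ') = true) :
    ∃ t ∈ tokensFrom row j, t.1 ≤ x ∧ x < t.2 := by
  rw [tokensFrom]
  have h : j < row.length := by omega
  rw [dif_pos h]
  by_cases hdj : PySem.Chars.isdigit row[j] = true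
  · rw [if_pos hdj]
    by_cases hxk : x < pvRunEnd row j
    · exact ⟨(j, pvRunEnd row j), List.mem_cons_self .., hjx, hxk⟩
    · obtain ⟨t, ht, hc⟩ := tokensFrom_cover row (pvRunEnd row j) x (by omega) hx hd
      exact ⟨t, List.mem_cons_of_mem _ ht, hc⟩
  · rw [if_neg hdj]
    have hne : j ≠ x := by
      intro he
      subst he
      rw [getD_eq_getElem' row j h] at hd
      exact hdj hd
    exact tokensFrom_cover row (j+1) x (by omega) hx hd
termination_by row.length - j
decreasing_by
  · have := pvRunEnd_gt row j h hdj; omega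
  · omega

theorem tokensFrom_chain (row : List Char) (j : Nat) :
    (tokensFrom row j).Pairwise (fun a b => a.2 ≤ b.1) := by
  rw [tokensFrom]
  by_cases h : j < row.length
  · rw [dif_pos h]
    by_cases hd : PySem.Chars.isdigit row[j] = true
    · rw [if_pos hd]
      refine List.Pairwise.cons ?_ (tokensFrom_chain row (pvRunEnd row j))
      intro b hb
      exact (tokensFrom_bounds row (pvRunEnd row j) b hb).1
    · rw [if_neg hd]
      exact tokensFrom_chain row (j+1)
  · rw [dif_neg h]
    exact List.Pairwise.nil
termination_by row.length - j
decreasing_by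
  · have := pvRunEnd_gt row j h hd; omega
  · omega

-- ---------- numChars facts ----------
theorem numChars_nonempty (row : List Char) (s j : Nat) (h1 : s < j) (h2 : s < row.length) :
    numChars row s j ≠ [] := by
  unfold numChars
  have hlen : (row.drop s).length = row.length - s := List.length_drop ..
  intro hc
  have := congrArg List.length hc
  simp only [List.length_take, hlen, List.length_nil] at this
  omega

theorem numChars_snoc (row : List Char) (s j : Nat) (h1 : s ≤ j) (h2 : j < row.length) :
    numChars row s j ++ [row.getD j ' '] = numChars row s (j+1) := by
  unfold numChars
  have h3 : j + 1 - s = (j - s) + 1 := by omega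
  have hd : j - s < (row.drop s).length := by
    rw [List.length_drop]; omega
  have hg : (row.drop s)[j - s]'hd = row[j]'h2 := by
    rw [List.getElem_drop]
    congr 1
    omega
  rw [h3, List.take_add_one, List.getElem?_eq_getElem hd, getD_eq_getElem' row j h2, hg]
  rfl

theorem numChars_single (row : List Char) (j : Nat) (h : j < row.length) :
    numChars row j (j+1) = [row.getD j ' '] := by
  have hx := numChars_snoc row j j (Nat.le_refl j) h
  have h0 : numChars row j j = [] := by simp [numChars]
  rw [h0] at hx
  simpa using hx.symm

-- ---------- symbol map characterisation ----------
theorem mem_cellsZ (g : List String) (q : Int × Int) :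
    q ∈ cellsZ g ↔ (0 ≤ q.1 ∧ q.1 < PySem.List.len g ∧ 0 ≤ q.2 ∧ q.2 < PySem.List.len (rowOf g q.1)) := by
  unfold cellsZ
  rw [List.mem_flatMap]
  constructor
  · rintro ⟨i, hi, hq⟩
    rw [List.mem_map] at hq
    obtain ⟨j, hj, rfl⟩ := hq
    rw [PySem.List.mem_pyRange_one] at hi hj
    exact ⟨hi.1, hi.2, hj.1, hj.2⟩
  · rintro ⟨h1, h2, h3, h4⟩
    refine ⟨q.1, ?_, ?_⟩
    · rw [PySem.List.mem_pyRange_one]; exact ⟨h1, h2⟩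
    · rw [List.mem_map]
      exact ⟨q.2, by rw [PySem.List.mem_pyRange_one]; exact ⟨h3, h4⟩, rfl⟩

theorem gsm_row_get? (i : Int) (line : List Char) (js : List Int)
    (st : SymMap × PySem.Set Char) (q : Int × Int) :
    ((js.foldl (fun st j =>
        if PySem.List.pyGetD line j ' ' != '.' &&
            !(PySem.Chars.isdigit (PySem.List.pyGetD line j ' ')) then
          (st.1.insert (i, j) [], PySem.Set.add st.2 (PySem.List.pyGetD line j ' '))
        else st) st).1).get? q
      = if q.1 = i ∧ q.2 ∈ js.filter (fun j => symB (PySem.List.pyGetD line j ' '))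
        then some [] else st.1.get? q := by
  induction js generalizing st with
  | nil => simp
  | cons j js ih =>
    rw [List.foldl_cons, ih]
    try dsimp only
    rw [symB_def]
    by_cases hs : symB (PySem.List.pyGetD line j ' ') = true
    · have hfc : (j :: js).filter (fun j => symB (PySem.List.pyGetD line j ' '))
          = j :: js.filter (fun j => symB (PySem.List.pyGetD line j ' ')) := by
        simp [List.filter_cons, hs]
      rw [if_pos hs, hfc]
      by_cases hm : q.1 = i ∧ q.2 ∈ js.filter (fun j => symB (PySem.List.pyGetD line j ' '))
      · rw [if_pos hm, if_pos ⟨hm.1, List.mem_cons_of_mem _ hm.2⟩]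
      · rw [if_neg hm]
        try dsimp only
        by_cases hq : q = (i, j)
        · rw [if_pos (by rw [hq]; exact ⟨rfl, List.mem_cons_self ..⟩), hq]
          simp [PySem.Dict.get?_insert_self]
        · rw [PySem.Dict.get?_insert_of_ne _ _ hq, if_neg ?_]
          rintro ⟨ha, hb⟩
          rcases List.mem_cons.mp hb with hb | hb
          · exact hq (Prod.ext ha hb)
          · exact hm ⟨ha, hb⟩
    · have hs' : symB (PySem.List.pyGetD line j ' ') = false := by simpa using hs
      have hfc : (j :: js).filter (fun j => symB (PySem.List.pyGetD line j ' '))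
          = js.filter (fun j => symB (PySem.List.pyGetD line j ' ')) := by
        simp [List.filter_cons, hs']
      rw [if_neg hs, hfc]

theorem gsm_row_keys (i : Int) (line : List Char) (js : List Int)
    (st : SymMap × PySem.Set Char) (hnd : js.Nodup)
    (hf : ∀ j ∈ js, st.1.contains (i, j) = false) :
    ((js.foldl (fun st j =>
        if PySem.List.pyGetD line j ' ' != '.' &&
            !(PySem.Chars.isdigit (PySem.List.pyGetD line j ' ')) then
          (st.1.insert (i, j) [], PySem.Set.add st.2 (PySem.List.pyGetD line j ' '))
        else st) st).1).keys
      = st.1.keys ++ (js.filter (fun j => symB (PySem.List.pyGetD line j ' '))).map (fun j => (i, j)) := by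
  induction js generalizing st with
  | nil => simp
  | cons j js ih =>
    rw [List.foldl_cons]
    have hnj : j ∉ js := (List.nodup_cons.mp hnd).1
    try dsimp only
    rw [symB_def]
    by_cases hs : symB (PySem.List.pyGetD line j ' ') = true
    · have hfc : (j :: js).filter (fun j => symB (PySem.List.pyGetD line j ' '))
          = j :: js.filter (fun j => symB (PySem.List.pyGetD line j ' ')) := by
        simp [List.filter_cons, hs]
      rw [if_pos hs]
      rw [ih _ (List.nodup_cons.mp hnd).2 ?_]
      · dsimp only
        rw [PySem.Dict.keys_insert_of_not_contains _ _ (hf j (List.mem_cons_self ..)), hfc]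
        simp
      · intro j' hj'
        try dsimp only
        rw [PySem.Dict.contains_insert]
        have hne : ((i, j') == (i, j)) = false := by
          simp only [beq_eq_false_iff_ne]
          intro hc
          have : j' = j := by simpa using congrArg Prod.snd hc
          exact hnj (this ▸ hj')
        rw [hne, hf j' (List.mem_cons_of_mem _ hj')]
        rfl
    · have hs' : symB (PySem.List.pyGetD line j ' ') = false := by simpa using hs
      have hfc : (j :: js).filter (fun j => symB (PySem.List.pyGetD line j ' '))
          = js.filter (fun j => symB (PySem.List.pyGetD line j ' ')) := by
        simp [List.filter_cons, hs']
      rw [if_neg hs, ih _ (List.nodup_cons.mp hnd).2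
        (fun j' hj' => hf j' (List.mem_cons_of_mem _ hj')), hfc]

theorem gsm_row_contains (i : Int) (line : List Char) (js : List Int)
    (st : SymMap × PySem.Set Char) (q : Int × Int) :
    (((js.foldl (fun st j =>
        if PySem.List.pyGetD line j ' ' != '.' &&
            !(PySem.Chars.isdigit (PySem.List.pyGetD line j ' ')) then
          (st.1.insert (i, j) [], PySem.Set.add st.2 (PySem.List.pyGetD line j ' '))
        else st) st).1).contains q = true)
      ↔ ((q.1 = i ∧ q.2 ∈ js.filter (fun j => symB (PySem.List.pyGetD line j ' ')))
          ∨ st.1.contains q = true) := by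
  rw [PySem.Dict.contains_eq_isSome_get?, gsm_row_get?, PySem.Dict.contains_eq_isSome_get?]
  split
  · rename_i h
    exact ⟨fun _ => Or.inl h, fun _ => rfl⟩
  · rename_i h
    exact Iff.symm (or_iff_right h)

theorem gsm_outer_get? (g : List String) (is : List Int) (st : SymMap × PySem.Set Char)
    (q : Int × Int) :
    ((is.foldl (fun st i =>
        (PySem.List.pyRange 0 (PySem.List.len ((PySem.List.pyGetD g i "").toList)) 1).foldl
          (fun st j =>
            if PySem.List.pyGetD ((PySem.List.pyGetD g i "").toList) j ' ' != '.' &&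
                !(PySem.Chars.isdigit (PySem.List.pyGetD ((PySem.List.pyGetD g i "").toList) j ' ')) then
              (st.1.insert (i, j) [],
                PySem.Set.add st.2 (PySem.List.pyGetD ((PySem.List.pyGetD g i "").toList) j ' '))
            else st) st) st).1).get? q
      = if q.1 ∈ is ∧ q.2 ∈ (PySem.List.pyRange 0 (PySem.List.len (rowOf g q.1)) 1).filter
            (fun j => symB (PySem.List.pyGetD (rowOf g q.1) j ' '))
        then some [] else st.1.get? q := by
  induction is generalizing st with
  | nil => simp
  | cons i is ih =>
    rw [List.foldl_cons, ih]
    by_cases hm : q.1 ∈ is ∧ q.2 ∈ (PySem.List.pyRange 0 (PySem.List.len (rowOf g q.1)) 1).filter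
        (fun j => symB (PySem.List.pyGetD (rowOf g q.1) j ' '))
    · rw [if_pos hm, if_pos ⟨List.mem_cons_of_mem _ hm.1, hm.2⟩]
    · rw [if_neg hm]
      try dsimp only
      rw [gsm_row_get?, show (PySem.List.pyGetD g i "").toList = rowOf g i from rfl]
      by_cases hqi : q.1 = i
      · subst hqi
        by_cases hq2 : q.2 ∈ (PySem.List.pyRange 0 (PySem.List.len (rowOf g q.1)) 1).filter
            (fun j => symB (PySem.List.pyGetD (rowOf g q.1) j ' '))
        · rw [if_pos ⟨rfl, hq2⟩, if_pos ⟨List.mem_cons_self .., hq2⟩]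
        · rw [if_neg (fun h => hq2 h.2), if_neg (fun h => hq2 h.2)]
      · rw [if_neg (fun h => hqi h.1), if_neg ?_]
        rintro ⟨h1, h2⟩
        rcases List.mem_cons.mp h1 with h1 | h1
        · exact hqi h1
        · exact hm ⟨h1, h2⟩

theorem gsm_outer_keys (g : List String) (is : List Int) (st : SymMap × PySem.Set Char)
    (hnd : is.Nodup)
    (hf : ∀ ii jj : Int, st.1.contains (ii, jj) = true → ii ∉ is) :
    ((is.foldl (fun st i =>
        (PySem.List.pyRange 0 (PySem.List.len ((PySem.List.pyGetD g i "").toList)) 1).foldl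
          (fun st j =>
            if PySem.List.pyGetD ((PySem.List.pyGetD g i "").toList) j ' ' != '.' &&
                !(PySem.Chars.isdigit (PySem.List.pyGetD ((PySem.List.pyGetD g i "").toList) j ' ')) then
              (st.1.insert (i, j) [],
                PySem.Set.add st.2 (PySem.List.pyGetD ((PySem.List.pyGetD g i "").toList) j ' '))
            else st) st) st).1).keys
      = st.1.keys ++ is.flatMap (fun i =>
          ((PySem.List.pyRange 0 (PySem.List.len (rowOf g i)) 1).filter
            (fun j => symB (PySem.List.pyGetD (rowOf g i) j ' '))).map (fun j => (i, j))) := by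
  induction is generalizing st with
  | nil => simp
  | cons i is ih =>
    rw [List.foldl_cons]
    have hrow : ∀ j ∈ PySem.List.pyRange 0 (PySem.List.len ((PySem.List.pyGetD g i "").toList)) 1,
        st.1.contains (i, j) = false := by
      intro j _
      cases hb : st.1.contains (i, j)
      · rfl
      · exact absurd (List.mem_cons_self ..) (hf i j hb)
    rw [ih _ (List.nodup_cons.mp hnd).2 ?_]
    · try dsimp only
      rw [gsm_row_keys i _ _ _ (PySem.List.nodup_pyRange_one _ _) hrow,
        show (PySem.List.pyGetD g i "").toList = rowOf g i from rfl]
      simp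
    · intro ii jj hc hmem
      try dsimp only at hc
      rcases (gsm_row_contains i _ _ _ _).mp hc with ⟨h1, _⟩ | h1
      · subst h1
        exact (List.nodup_cons.mp hnd).1 hmem
      · exact hf ii jj h1 (List.mem_cons_of_mem _ hmem)

theorem get?_M0 (g : List String) (q : Int × Int) :
    (getSymbolMap g).1.get? q = if symAt g q.1 q.2 then some [] else none := by
  unfold getSymbolMap
  try dsimp only
  rw [gsm_outer_get?]
  have hiff : (q.1 ∈ PySem.List.pyRange 0 (PySem.List.len g) 1 ∧
      q.2 ∈ (PySem.List.pyRange 0 (PySem.List.len (rowOf g q.1)) 1).filter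
        (fun j => symB (PySem.List.pyGetD (rowOf g q.1) j ' ')))
      ↔ symAt g q.1 q.2 = true := by
    rw [List.mem_filter, PySem.List.mem_pyRange_one, PySem.List.mem_pyRange_one, symAt_iff]
    constructor
    · rintro ⟨⟨a, b⟩, ⟨c, d⟩, e⟩
      exact ⟨a, b, c, d, e⟩
    · rintro ⟨a, b, c, d, e⟩
      exact ⟨⟨a, b⟩, ⟨c, d⟩, e⟩
  by_cases h : symAt g q.1 q.2 = true
  · rw [if_pos (hiff.mpr h), if_pos h]
  · rw [if_neg (fun hc => h (hiff.mp hc)), if_neg h]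
    simp

theorem contains_M0 (g : List String) (q : Int × Int) :
    (getSymbolMap g).1.contains q = symAt g q.1 q.2 := by
  rw [PySem.Dict.contains_eq_isSome_get?, get?_M0]
  by_cases h : symAt g q.1 q.2 = true
  · simp [h]
  · have h' : symAt g q.1 q.2 = false := by simpa using h
    simp [h']

theorem symCells_eq (g : List String) :
    symCells g = (PySem.List.pyRange 0 (PySem.List.len g) 1).flatMap (fun i =>
      ((PySem.List.pyRange 0 (PySem.List.len (rowOf g i)) 1).filter
        (fun j => symB (PySem.List.pyGetD (rowOf g i) j ' '))).map (fun j => (i, j))) := by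
  unfold symCells cellsZ
  rw [filter_flatMap']
  apply flatMap_congr_mem
  intro i hi
  rw [PySem.List.mem_pyRange_one] at hi
  rw [List.filter_map, List.filter_congr ?_]
  intro j hj
  rw [PySem.List.mem_pyRange_one] at hj
  show symAt g i j = symB (PySem.List.pyGetD (rowOf g i) j ' ')
  unfold symAt
  simp only [PySem.List.len_eq] at hi hj
  simp [hi.1, hi.2, hj.1, hj.2]

theorem keys_M0 (g : List String) : (getSymbolMap g).1.keys = symCells g := by
  unfold getSymbolMap
  try dsimp only
  rw [gsm_outer_keys g _ _ (PySem.List.nodup_pyRange_one _ _)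
      (by intro ii jj h; simp [PySem.Dict.contains_empty] at h)]
  rw [symCells_eq]
  simp

theorem nodup_cellsZ (g : List String) : (cellsZ g).Nodup := by
  unfold cellsZ
  exact nodup_pairs_flatMap _ _ (PySem.List.nodup_pyRange_one _ _)
    (fun i => PySem.List.nodup_pyRange_one _ _)

theorem nodup_symCells (g : List String) : (symCells g).Nodup :=
  (nodup_cellsZ g).filter _

-- ---------- rect facts ----------
theorem mem_rect (i a b : Int) (q : Int × Int) :
    q ∈ rect i a b ↔ i - 1 ≤ q.1 ∧ q.1 ≤ i + 1 ∧ a ≤ q.2 ∧ q.2 < b := by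
  unfold rect
  rw [List.mem_flatMap]
  constructor
  · rintro ⟨i1, hi1, hq⟩
    rw [List.mem_map] at hq
    obtain ⟨j1, hj1, rfl⟩ := hq
    rw [PySem.List.mem_pyRange_one] at hi1 hj1
    exact ⟨by omega, by omega, hj1.1, hj1.2⟩
  · rintro ⟨h1, h2, h3, h4⟩
    exact ⟨q.1, by rw [PySem.List.mem_pyRange_one]; omega,
      by rw [List.mem_map]; exact ⟨q.2, by rw [PySem.List.mem_pyRange_one]; exact ⟨h3, h4⟩, rfl⟩⟩

theorem nodup_rect (i a b : Int) : (rect i a b).Nodup := by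
  unfold rect
  exact nodup_pairs_flatMap _ _ (PySem.List.nodup_pyRange_one _ _)
    (fun _ => PySem.List.nodup_pyRange_one _ _)

theorem mem_rect_iff_inRectB (t : Tok) (q : Int × Int) :
    q ∈ rect t.1 ((t.2.1 : Int) - 1) ((t.2.2 : Int) + 1) ↔ inRectB q t = true := by
  rw [mem_rect]
  unfold inRectB
  simp only [Bool.and_eq_true, decide_eq_true_eq]
  omega

theorem flushA_eq_cells (m : SymMap) (i s e v : Int) :
    pvFlushA m i s e v = (rect i (s-1) (e+2)).foldl (cellA v) (false, m) := by
  unfold pvFlushA rect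
  rw [List.foldl_flatMap]
  apply PySem.List.foldl_congr_mem
  intro st i1 _
  rw [List.foldl_map]
  rfl

-- ---------- A's inner loop is the token fold ----------
theorem runwalk_mid (row : List Char) (i : Int) (s e : Nat) (he : e < row.length)
    (hd : ∀ x, s ≤ x → x < e → PySem.Chars.isdigit (row.getD x ' ') = true)
    (j : Nat) (hj1 : s < j) (hj2 : j ≤ e) (p1 : Int) (m : SymMap) :
    (PySem.List.pyRange (j : Int) (e : Int) 1).foldl (pvBodyA row i)
        (p1, m, (s : Int), (j : Int) - 1, numChars row s j)
      = (p1, m, (s : Int), (e : Int) - 1, numChars row s e) := by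
  by_cases hje : j = e
  · subst hje
    rw [PySem.List.pyRange_one_eq_nil (le_refl _)]
    rfl
  · have hjlt : j < e := by omega
    rw [PySem.List.pyRange_one_cons (by exact_mod_cast hjlt), List.foldl_cons]
    have hdig : PySem.Chars.isdigit (row[j]?.getD ' ') = true := by
      rw [← List.getD_eq_getElem?_getD]
      exact hd j (by omega) hjlt
    have hlast : ¬((j : Int) = (row.length : Int) - 1) := by omega
    have hne : numChars row s j ≠ [] := numChars_nonempty row s j hj1 (by omega)
    have hb : pvBodyA row i (p1, m, (s : Int), (j : Int) - 1, numChars row s j) (j : Int)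
        = (p1, m, (s : Int), (j : Int), numChars row s (j+1)) := by
      rw [← numChars_snoc row s j (by omega) (by omega)]
      simp [pvBodyA, hdig, hlast, hne]
    rw [hb]
    have hc1 : ((j : Int) + 1) = ((j+1 : Nat) : Int) := by push_cast; ring
    rw [hc1]
    have hrec := runwalk_mid row i s e he hd (j+1) (by omega) (by omega) p1 m
    have hc2 : ((j+1 : Nat) : Int) - 1 = (j : Int) := by push_cast; ring
    rw [hc2] at hrec
    exact hrec
termination_by e - j

theorem runwalk_end (row : List Char) (i : Int) (s e : Nat) (he : e = row.length) (hs : s < e)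
    (hd : ∀ x, s ≤ x → x < e → PySem.Chars.isdigit (row.getD x ' ') = true)
    (j : Nat) (hj1 : s < j) (hj2 : j < e) (p1 : Int) (m : SymMap) :
    (PySem.List.pyRange (j : Int) (e : Int) 1).foldl (pvBodyA row i)
        (p1, m, (s : Int), (j : Int) - 1, numChars row s j)
      = ((stepTokenA row i (p1, m) (s, e)).1, (stepTokenA row i (p1, m) (s, e)).2,
          (s : Int), (e : Int) - 1, []) := by
  have hdig : PySem.Chars.isdigit (row[j]?.getD ' ') = true := by
    rw [← List.getD_eq_getElem?_getD]
    exact hd j (by omega) hj2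
  have hne : numChars row s j ≠ [] := numChars_nonempty row s j hj1 (by omega)
  rw [PySem.List.pyRange_one_cons (by exact_mod_cast hj2), List.foldl_cons]
  by_cases hjl : j = e - 1
  · have hsn : numChars row s j ++ [row[j]?.getD ' '] = numChars row s e := by
      rw [← List.getD_eq_getElem?_getD, numChars_snoc row s j (by omega) (by omega)]
      congr 1
      omega
    have hne2 : numChars row s e ≠ [] := numChars_nonempty row s e (by omega) (by omega)
    have hl2 : (j : Int) = (row.length : Int) - 1 := by omega
    have hE : ((e : Nat) : Int) = ((row.length : Nat) : Int) := by omega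
    have h1e : (j : Int) + 1 = (e : Int) := by omega
    rw [h1e, PySem.List.pyRange_one_eq_nil (le_refl _), List.foldl_nil]
    simp only [pvBodyA, PySem.List.pyGetD_natCast, List.getD_eq_getElem?_getD, hdig,
      stepTokenA, valTok]
    simp [hdig, hne, hne2, hsn, hl2, hE]
  · have hlast : ¬((j : Int) = (row.length : Int) - 1) := by omega
    have hb : pvBodyA row i (p1, m, (s : Int), (j : Int) - 1, numChars row s j) (j : Int)
        = (p1, m, (s : Int), (j : Int), numChars row s (j+1)) := by
      rw [← numChars_snoc row s j (by omega) (by omega)]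
      simp [pvBodyA, hdig, hlast, hne]
    rw [hb]
    have hc1 : ((j : Int) + 1) = ((j+1 : Nat) : Int) := by push_cast; ring
    rw [hc1]
    have hrec := runwalk_end row i s e he hs hd (j+1) (by omega) (by omega) p1 m
    have hc2 : ((j+1 : Nat) : Int) - 1 = (j : Int) := by push_cast; ring
    rw [hc2] at hrec
    exact hrec
termination_by e - j

theorem innerA_eq (row : List Char) (i : Int) (j0 : Nat) (hj0 : j0 ≤ row.length)
    (p1 : Int) (m : SymMap) (start endv : Int) :
    ∃ s' e',
      (PySem.List.pyRange (j0 : Int) (PySem.List.len row) 1).foldl (pvBodyA row i)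
          (p1, m, start, endv, ([] : List Char))
        = (((tokensFrom row j0).foldl (stepTokenA row i) (p1, m)).1,
           ((tokensFrom row j0).foldl (stepTokenA row i) (p1, m)).2, s', e', ([] : List Char)) := by
  by_cases hend : row.length ≤ j0
  · rw [PySem.List.pyRange_one_eq_nil (by simp only [PySem.List.len_eq]; omega),
      tokensFrom_stop row j0 hend]
    exact ⟨start, endv, rfl⟩
  · have hlt : j0 < row.length := by omega
    have hcons : (j0 : Int) < PySem.List.len row := by simp only [PySem.List.len_eq]; exact_mod_cast hlt
    rw [PySem.List.pyRange_one_cons hcons, List.foldl_cons]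
    have hc1 : ((j0 : Int) + 1) = ((j0+1 : Nat) : Int) := by push_cast; ring
    by_cases hdig : PySem.Chars.isdigit row[j0] = true
    · have hdig' : PySem.Chars.isdigit (row[j0]?.getD ' ') = true := by
        rw [← List.getD_eq_getElem?_getD, getD_eq_getElem' row j0 hlt]
        exact hdig
      have hj0e : j0 < pvRunEnd row j0 := pvRunEnd_gt row j0 hlt hdig
      have hele : pvRunEnd row j0 ≤ row.length := pvRunEnd_le row j0 (by omega)
      rw [tokensFrom_run row j0 hlt hdig, List.foldl_cons]
      by_cases hj0l : j0 = row.length - 1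
      · -- trailing one-digit run: the flush happens inside this very iteration
        have he2 : pvRunEnd row j0 = row.length := by omega
        have hsn : [row[j0]?.getD ' '] = numChars row j0 (pvRunEnd row j0) := by
          rw [show pvRunEnd row j0 = j0 + 1 by omega, numChars_single row j0 hlt,
            List.getD_eq_getElem?_getD]
        have hl2 : (j0 : Int) = (row.length : Int) - 1 := by omega
        have hE : ((pvRunEnd row j0 : Nat) : Int) = ((row.length : Nat) : Int) := by omega
        have hb : pvBodyA row i (p1, m, start, endv, []) (j0 : Int)
            = ((stepTokenA row i (p1, m) (j0, pvRunEnd row j0)).1,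
               (stepTokenA row i (p1, m) (j0, pvRunEnd row j0)).2, (j0 : Int), (j0 : Int), []) := by
          simp only [pvBodyA, PySem.List.pyGetD_natCast, List.getD_eq_getElem?_getD, hdig',
            stepTokenA, valTok]
          simp [hdig', ← hsn, hl2, hE]
        rw [hb, hc1]
        rw [show ((j0+1 : Nat) : Int) = PySem.List.len row by simp only [PySem.List.len_eq]; omega]
        rw [PySem.List.pyRange_one_eq_nil (le_refl _), tokensFrom_stop row _ (by omega),
          List.foldl_nil]
        exact ⟨(j0 : Int), (j0 : Int), rfl⟩
      · have hlast : ¬((j0 : Int) = (row.length : Int) - 1) := by omega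
        have hb : pvBodyA row i (p1, m, start, endv, []) (j0 : Int)
            = (p1, m, (j0 : Int), (j0 : Int), numChars row j0 (j0+1)) := by
          have h1 : numChars row j0 (j0+1) = [row[j0]?.getD ' '] := by
            rw [numChars_single row j0 hlt, List.getD_eq_getElem?_getD]
          rw [h1]
          simp [pvBodyA, hdig', hlast]
        rw [hb, hc1]
        have hstart : ((j0+1 : Nat) : Int) - 1 = (j0 : Int) := by push_cast; ring
        by_cases hcase : pvRunEnd row j0 = row.length
        · have hre := runwalk_end row i j0 (pvRunEnd row j0) hcase hj0e
            (pvRunEnd_digits row j0) (j0+1) (by omega) (by omega) p1 m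
          rw [hstart] at hre
          rw [show PySem.List.len row = ((pvRunEnd row j0 : Nat) : Int) by
            simp only [PySem.List.len_eq]; omega]
          rw [hre, tokensFrom_stop row (pvRunEnd row j0) (by omega), List.foldl_nil]
          exact ⟨(j0 : Int), ((pvRunEnd row j0 : Nat) : Int) - 1, rfl⟩
        · have hcl : pvRunEnd row j0 < row.length := by omega
          rw [show PySem.List.len row = ((row.length : Nat) : Int) by simp only [PySem.List.len_eq]]
          rw [PySem.List.pyRange_one_append ((j0+1 : Nat) : Int) ((pvRunEnd row j0 : Nat) : Int)
              ((row.length : Nat) : Int) (by exact_mod_cast (by omega : j0+1 ≤ pvRunEnd row j0))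
              (by exact_mod_cast hele), List.foldl_append]
          have hmid := runwalk_mid row i j0 (pvRunEnd row j0) hcl (pvRunEnd_digits row j0)
            (j0+1) (by omega) (by omega) p1 m
          rw [hstart] at hmid
          rw [hmid]
          rcases pvRunEnd_stop row j0 (by omega) with hstop | ⟨_, hnd2⟩
          · omega
          have hnum : numChars row j0 (pvRunEnd row j0) ≠ [] :=
            numChars_nonempty row j0 _ hj0e hlt
          rw [PySem.List.pyRange_one_cons (by exact_mod_cast hcl), List.foldl_cons]
          have hnd3 : PySem.Chars.isdigit (row[pvRunEnd row j0]?.getD ' ') = false := by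
            rw [← List.getD_eq_getElem?_getD]
            exact hnd2
          have hb2 : pvBodyA row i
              (p1, m, (j0 : Int), ((pvRunEnd row j0 : Nat) : Int) - 1,
                numChars row j0 (pvRunEnd row j0)) ((pvRunEnd row j0 : Nat) : Int)
              = ((stepTokenA row i (p1, m) (j0, pvRunEnd row j0)).1,
                 (stepTokenA row i (p1, m) (j0, pvRunEnd row j0)).2, (j0 : Int),
                 ((pvRunEnd row j0 : Nat) : Int) - 1, []) := by
            simp [pvBodyA, hnd3, hnum, stepTokenA, valTok]
          rw [hb2]
          have hc3 : (((pvRunEnd row j0 : Nat) : Int) + 1) = ((pvRunEnd row j0 + 1 : Nat) : Int) := by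
            push_cast; ring
          rw [hc3]
          obtain ⟨s', e', hrec⟩ := innerA_eq row i (pvRunEnd row j0 + 1) (by omega)
            (stepTokenA row i (p1, m) (j0, pvRunEnd row j0)).1
            (stepTokenA row i (p1, m) (j0, pvRunEnd row j0)).2 (j0 : Int)
            (((pvRunEnd row j0 : Nat) : Int) - 1)
          rw [show ((row.length : Nat) : Int) = PySem.List.len row by simp only [PySem.List.len_eq]]
          rw [tokensFrom_skip row (pvRunEnd row j0) hcl
            (by rw [← getD_eq_getElem' row _ hcl, List.getD_eq_getElem?_getD]; exact hnd3)]
          exact ⟨s', e', by simpa using hrec⟩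
    · have hdig' : PySem.Chars.isdigit (row[j0]?.getD ' ') = false := by
        rw [← List.getD_eq_getElem?_getD, getD_eq_getElem' row j0 hlt]
        simpa using hdig
      have hb : pvBodyA row i (p1, m, start, endv, []) (j0 : Int) = (p1, m, start, endv, []) := by
        simp [pvBodyA, hdig']
      rw [hb, hc1, tokensFrom_skip row j0 hlt (by simpa using hdig)]
      exact innerA_eq row i (j0+1) (by omega) p1 m start endv
termination_by row.length - j0
decreasing_by
  · omega
  · omega

-- ---------- A: invariant of the token fold ----------
def AInv (g : List String) (done : List Tok) (p1 : Int) (m : SymMap) : Prop :=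
  m.keys = symCells g ∧ (∀ q : Int × Int, m.contains q = symAt g q.1 q.2) ∧
  (∀ q : Int × Int, m.getD q []
      = (done.filter (fun t => symAt g q.1 q.2 && inRectB q t)).map (tokVal g)) ∧
  p1 = ((done.filter (hitSym g)).map (tokVal g)).sum

theorem AInv_init (g : List String) : AInv g [] 0 (getSymbolMap g).1 := by
  refine ⟨keys_M0 g, contains_M0 g, ?_, rfl⟩
  intro q
  rw [PySem.Dict.getD_eq_get?_getD, get?_M0]
  by_cases h : symAt g q.1 q.2 = true <;> simp [h]

theorem cellsA_run (g : List String) (v : Int) (cs : List (Int × Int)) (hnd : cs.Nodup)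
    (f : Bool) (m : SymMap) (hC : ∀ q : Int × Int, m.contains q = symAt g q.1 q.2) :
    ((cs.foldl (cellA v) (f, m)).1 = (f || cs.any (fun q => symAt g q.1 q.2))) ∧
    ((cs.foldl (cellA v) (f, m)).2.keys = m.keys) ∧
    (∀ q : Int × Int, (cs.foldl (cellA v) (f, m)).2.contains q = m.contains q) ∧
    (∀ q : Int × Int, (cs.foldl (cellA v) (f, m)).2.getD q []
        = m.getD q [] ++ (if symAt g q.1 q.2 && decide (q ∈ cs) then [v] else [])) := by
  induction cs generalizing f m with
  | nil => exact ⟨by simp, rfl, fun q => rfl, fun q => by simp⟩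
  | cons c cs ih =>
    obtain ⟨hcn, hnd'⟩ := List.nodup_cons.mp hnd
    rw [List.foldl_cons]
    by_cases hc : m.contains c = true
    · have hstep : cellA v (f, m) c = (true, m.insert c (m.getD c [] ++ [v])) := by
        unfold cellA
        rw [if_pos hc]
      have hC1 : ∀ q : Int × Int, (m.insert c (m.getD c [] ++ [v])).contains q
          = symAt g q.1 q.2 := by
        intro q
        rw [PySem.Dict.contains_insert]
        by_cases hq : q = c
        · subst hq
          simp [← hC q, hc]
        · have : (q == c) = false := by simpa using hq
          rw [this, hC q]
          simp
      obtain ⟨i1, i2, i3, i4⟩ := ih hnd' true _ hC1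
      rw [hstep]
      refine ⟨?_, ?_, ?_, ?_⟩
      · rw [i1]
        have : symAt g c.1 c.2 = true := by rw [← hC c]; exact hc
        simp [this]
      · rw [i2, PySem.Dict.keys_insert_of_contains _ _ hc]
      · intro q
        rw [i3 q, hC1 q, hC q]
      · intro q
        rw [i4 q, PySem.Dict.getD_insert]
        by_cases hq : q = c
        · subst hq
          have hsy : symAt g q.1 q.2 = true := by rw [← hC q]; exact hc
          have hqcs : decide (q ∈ cs) = false := by simpa using hcn
          simp [hsy, hqcs]
        · have h1 : decide (q ∈ c :: cs) = decide (q ∈ cs) := by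
            simp [List.mem_cons, hq]
          rw [if_neg hq, h1]
    · have hsy : symAt g c.1 c.2 = false := by rw [← hC c]; simpa using hc
      have hstep : cellA v (f, m) c = (f, m) := by
        unfold cellA
        rw [if_neg hc]
      obtain ⟨i1, i2, i3, i4⟩ := ih hnd' f _ hC
      rw [hstep]
      refine ⟨?_, i2, i3, ?_⟩
      · rw [i1]
        simp [hsy]
      · intro q
        rw [i4 q]
        by_cases hq : q = c
        · subst hq
          simp [hsy]
        · have h1 : decide (q ∈ c :: cs) = decide (q ∈ cs) := by
            simp [List.mem_cons, hq]
          rw [h1]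

def stepTok (g : List String) (st : Int × SymMap) (t : Tok) : Int × SymMap :=
  stepTokenA (rowOf g t.1) t.1 st t.2

theorem stepTok_inv (g : List String) (t : Tok) (done : List Tok) (p1 : Int) (m : SymMap)
    (h : AInv g done p1 m) : AInv g (done ++ [t]) (stepTok g (p1, m) t).1 (stepTok g (p1, m) t).2 := by
  obtain ⟨hK, hC, hG, hP⟩ := h
  obtain ⟨i, s, e⟩ := t
  unfold stepTok stepTokenA
  dsimp only
  rw [flushA_eq_cells]
  have harg : ((e : Int) - 1) + 2 = (e : Int) + 1 := by ring
  rw [harg]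
  obtain ⟨r1, r2, r3, r4⟩ := cellsA_run g (valTok (rowOf g i) s e)
    (rect i ((s : Int) - 1) ((e : Int) + 1)) (nodup_rect _ _ _) false m hC
  have hflag : (List.foldl (cellA (valTok (rowOf g i) s e)) (false, m)
      (rect i ((s : Int) - 1) ((e : Int) + 1))).1 = hitSym g (i, s, e) := by
    rw [r1]
    simp only [Bool.false_or]
    rfl
  refine ⟨by rw [r2, hK], fun q => by rw [r3 q, hC q], ?_, ?_⟩
  · intro q
    rw [r4 q, hG q, List.filter_append, List.map_append]
    congr 1
    have hmem : decide (q ∈ rect i ((s : Int) - 1) ((e : Int) + 1)) = inRectB q (i, s, e) := by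
      by_cases hm : inRectB q (i, s, e) = true
      · rw [hm, decide_eq_true ((mem_rect_iff_inRectB (i, s, e) q).mpr hm)]
      · have hm' : inRectB q (i, s, e) = false := by simpa using hm
        rw [hm', decide_eq_false (fun hq => hm ((mem_rect_iff_inRectB (i, s, e) q).mp hq))]
    rw [hmem]
    by_cases hp : (symAt g q.1 q.2 && inRectB q (i, s, e)) = true
    · rw [if_pos hp]
      simp [List.filter_cons, hp, tokVal]
    · have hp' : (symAt g q.1 q.2 && inRectB q (i, s, e)) = false := by simpa using hp
      rw [if_neg hp]
      simp [List.filter_cons, hp']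
  · rw [hflag, hP, List.filter_append, List.map_append, List.sum_append]
    by_cases hh : hitSym g (i, s, e) = true
    · rw [if_pos hh]
      simp [List.filter_cons, hh, tokVal]
    · have hh' : hitSym g (i, s, e) = false := by simpa using hh
      rw [if_neg (by simp [hh'])]
      simp [List.filter_cons, hh']

theorem tokFold_inv (g : List String) (ts : List Tok) :
    ∀ (done : List Tok) (p1 : Int) (m : SymMap), AInv g done p1 m →
      AInv g (done ++ ts) (ts.foldl (stepTok g) (p1, m)).1 (ts.foldl (stepTok g) (p1, m)).2 := by
  induction ts with
  | nil => intro done p1 m h; simpa using h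
  | cons t ts ih =>
    intro done p1 m h
    have h1 := stepTok_inv g t done p1 m h
    rw [List.foldl_cons]
    obtain ⟨x1, x2, hx⟩ : ∃ x1 x2, stepTok g (p1, m) t = (x1, x2) := ⟨_, _, rfl⟩
    rw [hx]
    rw [hx] at h1
    have h2 := ih (done ++ [t]) x1 x2 h1
    simpa using h2

theorem gTerm_eq_zero_of_not_symAt (g : List String) (q : Int × Int)
    (h : symAt g q.1 q.2 = false) : gTerm g q = 0 := by
  unfold gTerm
  have hst : starAt g q.1 q.2 = false := by
    cases hb : starAt g q.1 q.2
    · rfl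
    · exfalso
      obtain ⟨a, b, c, d, e⟩ := (starAt_iff g q.1 q.2).mp hb
      have : symAt g q.1 q.2 = true :=
        (symAt_iff g q.1 q.2).mpr ⟨a, b, c, d, by rw [e]; decide⟩
      rw [this] at h
      cases h
  simp [hst]

theorem twoProd (l : List Int) (h : l.length = 2) :
    PySem.List.pyGetD l 0 0 * PySem.List.pyGetD l 1 0 = l.prod := by
  obtain ⟨a, b, rfl⟩ := List.length_eq_two.mp h
  simp [PySem.List.pyGetD]

-- A's closed form
theorem solveA_closed (g : List String) :
    solve g = ((((allToks g).filter (hitSym g)).map (tokVal g)).sum,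
               ((cellsZ g).map (gTerm g)).sum) := by
  have hbodyA : ∀ (st : Int × SymMap) (i : Int),
      ((((PySem.List.pyRange 0 (PySem.List.len ((PySem.List.pyGetD g i "").toList)) 1).foldl
          (pvBodyA ((PySem.List.pyGetD g i "").toList) i) (st.1, st.2, -2, -2, [])).1,
        ((PySem.List.pyRange 0 (PySem.List.len ((PySem.List.pyGetD g i "").toList)) 1).foldl
          (pvBodyA ((PySem.List.pyGetD g i "").toList) i) (st.1, st.2, -2, -2, [])).2.1)
        : Int × SymMap)
      = (tokensFrom (rowOf g i) 0).foldl (stepTokenA (rowOf g i) i) st := by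
    intro st i
    obtain ⟨s', e', hr⟩ := innerA_eq (rowOf g i) i 0 (by omega) st.1 st.2 (-2) (-2)
    simp only [Nat.cast_zero] at hr
    rw [show (PySem.List.pyGetD g i "").toList = rowOf g i from rfl, hr]
  have hTA : (PySem.List.pyRange 0 (PySem.List.len g) 1).foldl
      (fun (st : Int × SymMap) i =>
        (((PySem.List.pyRange 0 (PySem.List.len ((PySem.List.pyGetD g i "").toList)) 1).foldl
            (pvBodyA ((PySem.List.pyGetD g i "").toList) i) (st.1, st.2, -2, -2, [])).1,
         ((PySem.List.pyRange 0 (PySem.List.len ((PySem.List.pyGetD g i "").toList)) 1).foldl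
            (pvBodyA ((PySem.List.pyGetD g i "").toList) i) (st.1, st.2, -2, -2, [])).2.1))
      (0, (getSymbolMap g).1)
    = (allToks g).foldl (stepTok g) (0, (getSymbolMap g).1) := by
    rw [show allToks g = (PySem.List.pyRange 0 (PySem.List.len g) 1).flatMap (fun i =>
        (tokensFrom (rowOf g i) 0).map (fun t => (i, t))) from rfl, List.foldl_flatMap]
    refine PySem.List.foldl_congr_mem _ _ _ _ ?_
    intro st i _
    rw [hbodyA st i, List.foldl_map]
    rfl
  have hfin := tokFold_inv g (allToks g) [] 0 (getSymbolMap g).1 (AInv_init g)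
  rw [List.nil_append] at hfin
  obtain ⟨hK, hC, hG, hP⟩ := hfin
  show (let symbol_map := (getSymbolMap g).1
    let r := (PySem.List.pyRange 0 (PySem.List.len g) 1).foldl
      (fun (st : Int × SymMap) i =>
        let line := (PySem.List.pyGetD g i "").toList
        let r := (PySem.List.pyRange 0 (PySem.List.len line) 1).foldl (pvBodyA line i)
          (st.1, st.2, -2, -2, [])
        (r.1, r.2.1)) (0, symbol_map)
    let p2 := r.2.items.foldl (fun p2 kv =>
        if PySem.List.pyGetD (PySem.List.pyGetD g kv.1.1 "").toList kv.1.2 ' ' == '*'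
            && PySem.List.len kv.2 == 2 then
          p2 + PySem.List.pyGetD kv.2 0 0 * PySem.List.pyGetD kv.2 1 0
        else p2) 0
    (r.1, p2)) = _
  simp only
  rw [hTA]
  refine Prod.ext ?_ ?_
  · exact hP
  · -- the p2 pass over the dict items
    show ((allToks g).foldl (stepTok g) (0, (getSymbolMap g).1)).2.items.foldl _ 0 = _
    set m := ((allToks g).foldl (stepTok g) (0, (getSymbolMap g).1)).2 with hm
    have hnd : m.keys.Nodup := by rw [hK]; exact nodup_symCells g
    rw [PySem.Dict.items_eq_map_keys m hnd [], hK, List.foldl_map]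
    have hstep : ∀ (acc : Int) (q : Int × Int), q ∈ symCells g →
        (if PySem.List.pyGetD (PySem.List.pyGetD g q.1 "").toList q.2 ' ' == '*'
            && PySem.List.len (m.getD q []) == 2 then
          acc + PySem.List.pyGetD (m.getD q []) 0 0 * PySem.List.pyGetD (m.getD q []) 1 0
        else acc) = acc + gTerm g q := by
      intro acc q hq
      have hsy : symAt g q.1 q.2 = true := (List.mem_filter.mp hq).2
      obtain ⟨a, b, c, d, e⟩ := (symAt_iff g q.1 q.2).mp hsy
      have hGq : m.getD q [] = (adjToks g q).map (tokVal g) := by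
        rw [hG q]
        congr 1
        unfold adjToks
        apply List.filter_congr
        intro t _
        rw [hsy, Bool.true_and]
      have hchar : (PySem.List.pyGetD (PySem.List.pyGetD g q.1 "").toList q.2 ' ' == '*')
          = starAt g q.1 q.2 := by
        unfold starAt
        rw [show (PySem.List.pyGetD g q.1 "").toList = rowOf g q.1 from rfl]
        simp only [PySem.List.len_eq] at b d
        simp [a, b, c, d, PySem.List.len_eq]
      rw [hGq, hchar]
      have hlen : (PySem.List.len ((adjToks g q).map (tokVal g)) == 2)
          = ((adjToks g q).length == 2) := by
        by_cases h2 : (adjToks g q).length = 2 <;>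
          simp [PySem.List.len_eq, h2] <;> omega
      rw [hlen]
      unfold gTerm
      by_cases hc : (starAt g q.1 q.2 && ((adjToks g q).length == 2)) = true
      · rw [if_pos hc, if_pos hc]
        have hc2 := hc
        simp only [Bool.and_eq_true, beq_iff_eq] at hc2
        have hl2 : ((adjToks g q).map (tokVal g)).length = 2 := by
          rw [List.length_map]
          exact hc2.2
        rw [twoProd _ hl2]
      · have hc' : (starAt g q.1 q.2 && ((adjToks g q).length == 2)) = false := by
          simpa using hc
        rw [if_neg (by simp [hc']), if_neg (by simp [hc'])]
        simp
    refine (PySem.List.foldl_congr_mem _ _ (fun acc q => acc + gTerm g q) _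
      (fun acc q hq => hstep acc q hq)).trans ?_
    rw [PySem.List.foldl_add, Int.zero_add]
    unfold symCells
    rw [sum_map_filter_eq]
    congr 1
    apply List.map_congr_left
    intro q hq
    by_cases hs : symAt g q.1 q.2 = true
    · rw [if_pos hs]
    · rw [if_neg hs, gTerm_eq_zero_of_not_symAt g q (by simpa using hs)]

-- ---------- B: the digit-cell → token index ----------
def tokPred (c : Int × Int) (t : Nat × Nat) : Bool :=
  decide ((t.1 : Int) ≤ c.2) && decide (c.2 < (t.2 : Int))

def tokAt (g : List String) (c : Int × Int) : Option Tok :=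
  if 0 ≤ c.1 ∧ c.1 < PySem.List.len g then
    ((tokensFrom (rowOf g c.1) 0).find? (tokPred c)).map (fun t => (c.1, t))
  else none

def cellTokF (g : List String) : CellTok :=
  (PySem.List.enumerate g).foldl (fun d p => pvIndexRow p.1 p.2.toList 0 d) PySem.Dict.empty

theorem mem_allToks (g : List String) (t : Tok) :
    t ∈ allToks g ↔ 0 ≤ t.1 ∧ t.1 < PySem.List.len g ∧ t.2 ∈ tokensFrom (rowOf g t.1) 0 := by
  unfold allToks
  rw [List.mem_flatMap]
  constructor
  · rintro ⟨i, hi, hm⟩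
    rw [List.mem_map] at hm
    obtain ⟨t', ht', rfl⟩ := hm
    rw [PySem.List.mem_pyRange_one] at hi
    exact ⟨hi.1, hi.2, ht'⟩
  · rintro ⟨h1, h2, h3⟩
    exact ⟨t.1, by rw [PySem.List.mem_pyRange_one]; exact ⟨h1, h2⟩,
      by rw [List.mem_map]; exact ⟨t.2, h3, rfl⟩⟩

theorem chain_unique (c : Int × Int) (l : List (Nat × Nat))
    (hp : l.Pairwise (fun a b => a.2 ≤ b.1)) :
    ∀ u ∈ l, ∀ w ∈ l, tokPred c u = true → tokPred c w = true → u = w := by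
  induction l with
  | nil => intro u hu; cases hu
  | cons x l ih =>
    obtain ⟨hx, hl⟩ := List.pairwise_cons.mp hp
    intro u hu w hw hpu hpw
    unfold tokPred at hpu hpw
    simp only [Bool.and_eq_true, decide_eq_true_eq] at hpu hpw
    rcases List.mem_cons.mp hu with rfl | hu' <;> rcases List.mem_cons.mp hw with rfl | hw'
    · rfl
    · exfalso
      have := hx w hw'
      omega
    · exfalso
      have := hx u hu'
      omega
    · exact ih hl u hu' w hw'
        (by unfold tokPred; simp only [Bool.and_eq_true, decide_eq_true_eq]; omega)
        (by unfold tokPred; simp only [Bool.and_eq_true, decide_eq_true_eq]; omega)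

theorem tokAt_eq_some_iff (g : List String) (c : Int × Int) (t : Tok) :
    tokAt g c = some t ↔ t ∈ allToks g ∧ t.1 = c.1 ∧
      (t.2.1 : Int) ≤ c.2 ∧ c.2 < (t.2.2 : Int) := by
  unfold tokAt
  constructor
  · intro h
    split at h
    · rename_i hr
      rw [Option.map_eq_some_iff] at h
      obtain ⟨t', hf, rfl⟩ := h
      have hm := List.mem_of_find?_eq_some hf
      have hp := List.find?_some hf
      unfold tokPred at hp
      simp only [Bool.and_eq_true, decide_eq_true_eq] at hp
      exact ⟨(mem_allToks g (c.1, t')).mpr ⟨hr.1, hr.2, hm⟩, rfl, hp.1, hp.2⟩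
    · cases h
  · rintro ⟨hmem, h1, h2, h3⟩
    obtain ⟨ha, hb, hc⟩ := (mem_allToks g t).mp hmem
    rw [if_pos (by rw [← h1]; exact ⟨ha, hb⟩)]
    have hfind : (tokensFrom (rowOf g c.1) 0).find? (tokPred c) = some t.2 := by
      apply find?_unique _ _ t.2 (h1 ▸ hc)
      · unfold tokPred
        simp only [Bool.and_eq_true, decide_eq_true_eq]
        exact ⟨h2, h3⟩
      · intro u hu hpu
        exact chain_unique c _ (tokensFrom_chain (rowOf g c.1) 0) u hu t.2 (h1 ▸ hc) hpu
          (by unfold tokPred; simp only [Bool.and_eq_true, decide_eq_true_eq]; exact ⟨h2, h3⟩)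
    rw [hfind]
    simp [← h1]

theorem idOf_inj (g : List String) (t u : Tok) (ht : t ∈ allToks g) (hu : u ∈ allToks g)
    (h : idOf t = idOf u) : t = u := by
  obtain ⟨ha, hb, hc⟩ := (mem_allToks g t).mp ht
  obtain ⟨ha', hb', hc'⟩ := (mem_allToks g u).mp hu
  unfold idOf at h
  have h1 : t.1 = u.1 := by
    have := congrArg (fun p : Int × Int => p.1) h
    simpa using this
  have h2 : t.2.1 = u.2.1 := by
    have := congrArg (fun p : Int × Int => p.2) h
    simp only at this
    exact_mod_cast this
  have hbt := tokensFrom_bounds (rowOf g t.1) 0 t.2 hc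
  have hbu := tokensFrom_bounds (rowOf g u.1) 0 u.2 hc'
  rw [← h1] at hc'
  have heq : t.2 = u.2 := by
    apply chain_unique (t.1, (t.2.1 : Int)) _ (tokensFrom_chain (rowOf g t.1) 0) t.2 hc u.2 hc'
    · unfold tokPred
      simp only [Bool.and_eq_true, decide_eq_true_eq]
      constructor
      · omega
      · exact_mod_cast Int.ofNat_lt.mpr hbt.2.1
    · unfold tokPred
      simp only [Bool.and_eq_true, decide_eq_true_eq]
      constructor
      · omega
      · rw [h2]
        exact_mod_cast Int.ofNat_lt.mpr hbu.2.1
  exact Prod.ext h1 heq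

theorem nodup_tokensFrom (row : List Char) (j : Nat) : (tokensFrom row j).Nodup := by
  have hch := tokensFrom_chain row j
  have hb := tokensFrom_bounds row j
  unfold List.Nodup
  refine List.Pairwise.imp_of_mem ?_ hch
  intro a b hma hmb hab
  intro he
  subst he
  have := (hb a hma).2.1
  omega

theorem nodup_allToks (g : List String) : (allToks g).Nodup := by
  unfold allToks
  exact nodup_pairs_flatMap _ _ (PySem.List.nodup_pyRange_one _ _)
    (fun i => nodup_tokensFrom (rowOf g i) 0)

theorem insList_get? (i : Int) (w : (Int × Int) × Int) (cs : List Int) (d : CellTok)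
    (q : Int × Int) :
    (cs.foldl (fun d c => d.insert (i, c) w) d).get? q
      = if q.1 = i ∧ q.2 ∈ cs then some w else d.get? q := by
  induction cs generalizing d with
  | nil => simp
  | cons c cs ih =>
    rw [List.foldl_cons, ih]
    by_cases hm : q.1 = i ∧ q.2 ∈ cs
    · rw [if_pos hm, if_pos ⟨hm.1, List.mem_cons_of_mem _ hm.2⟩]
    · rw [if_neg hm]
      by_cases hq : q = (i, c)
      · subst hq
        rw [if_pos ⟨rfl, List.mem_cons_self ..⟩, PySem.Dict.get?_insert_self]
      · rw [PySem.Dict.get?_insert_of_ne _ _ hq, if_neg ?_]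
        rintro ⟨h1, h2⟩
        rcases List.mem_cons.mp h2 with h2 | h2
        · exact hq (Prod.ext h1 h2)
        · exact hm ⟨h1, h2⟩

theorem pvIndexRow_get? (i : Int) (row : List Char) (j : Nat) (d : CellTok) (q : Int × Int) :
    (pvIndexRow i row j d).get? q
      = match (tokensFrom row j).find? (tokPred q) with
        | some t => if q.1 = i then some ((i, (t.1 : Int)), valTok row t.1 t.2) else d.get? q
        | none => d.get? q := by
  rw [pvIndexRow]
  by_cases h : j < row.length
  · rw [dif_pos h]
    by_cases hd : PySem.Chars.isdigit row[j] = true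
    · rw [dif_pos hd, tokensFrom_run row j h hd]
      have hk := pvRunEnd_gt row j h hd
      have hkle := pvRunEnd_le row j (by omega)
      rw [pvIndexRow_get? i row (pvRunEnd row j)]
      have hrest : ∀ u ∈ tokensFrom row (pvRunEnd row j), tokPred q u = true →
          (pvRunEnd row j : Int) ≤ q.2 := by
        intro u hu hp
        have hb := tokensFrom_bounds row (pvRunEnd row j) u hu
        unfold tokPred at hp
        simp only [Bool.and_eq_true, decide_eq_true_eq] at hp
        have : (pvRunEnd row j : Int) ≤ (u.1 : Int) := by exact_mod_cast hb.1
        omega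
      have hv : (PySem.Int.ofChars? (PySem.List.slice row (some (j : Int))
            (some (pvRunEnd row j : Int)))).getD 0 = valTok row j (pvRunEnd row j) := by
        rw [PySem.List.slice_natCast]
        rfl
      by_cases hp : tokPred q (j, pvRunEnd row j) = true
      · have hq2 : ((j : Int) ≤ q.2 ∧ q.2 < (pvRunEnd row j : Int)) := by
          unfold tokPred at hp
          simp only [Bool.and_eq_true, decide_eq_true_eq] at hp
          exact hp
        have hnone : (tokensFrom row (pvRunEnd row j)).find? (tokPred q) = none := by
          rw [List.find?_eq_none]
          intro u hu
          intro hc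
          have := hrest u hu hc
          omega
        simp only [hnone, List.find?_cons_of_pos hp, insList_get?]
        have hmem : q.2 ∈ PySem.List.pyRange (j : Int) (pvRunEnd row j : Int) 1 := by
          rw [PySem.List.mem_pyRange_one]
          exact hq2
        by_cases hqi : q.1 = i
        · rw [if_pos ⟨hqi, hmem⟩, if_pos hqi, hv]
        · rw [if_neg (fun hx => hqi hx.1), if_neg hqi]
      · simp only [List.find?_cons_of_neg (by simpa using hp)]
        have hbase : ((PySem.List.pyRange (j : Int) (pvRunEnd row j : Int) 1).foldl
            (fun d c => d.insert (i, c) ((i, (j : Int)),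
              (PySem.Int.ofChars? (PySem.List.slice row (some (j : Int))
                (some (pvRunEnd row j : Int)))).getD 0)) d).get? q = d.get? q := by
          rw [insList_get?, if_neg ?_]
          rintro ⟨h1, h2⟩
          rw [PySem.List.mem_pyRange_one] at h2
          apply hp
          unfold tokPred
          simp only [Bool.and_eq_true, decide_eq_true_eq]
          exact h2
        cases hf : (tokensFrom row (pvRunEnd row j)).find? (tokPred q) with
        | none =>
          simp only [hf]
          exact hbase
        | some u =>
          simp only [hf]
          by_cases hqi : q.1 = i
          · rw [if_pos hqi, if_pos hqi]
          · rw [if_neg hqi, if_neg hqi]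
            exact hbase
    · rw [dif_neg hd, pvIndexRow_get? i row (j+1),
        tokensFrom_skip row j h (by simpa using hd)]
  · rw [dif_neg h, tokensFrom_stop row j (by omega)]
    simp
termination_by row.length - j
decreasing_by
  · have := pvRunEnd_gt row j h hd; omega
  · omega

theorem rowsIdx_get? (g : List String) (is : List Int) (d : CellTok) (q : Int × Int) :
    ((is.foldl (fun d i => pvIndexRow i (rowOf g i) 0 d) d).get? q)
      = if q.1 ∈ is then
          match (tokensFrom (rowOf g q.1) 0).find? (tokPred q) with
          | some t => some ((q.1, (t.1 : Int)), valTok (rowOf g q.1) t.1 t.2)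
          | none => d.get? q
        else d.get? q := by
  induction is generalizing d with
  | nil => simp
  | cons i is ih =>
    rw [List.foldl_cons, ih]
    have hone : (pvIndexRow i (rowOf g i) 0 d).get? q
        = if q.1 = i then
            match (tokensFrom (rowOf g q.1) 0).find? (tokPred q) with
            | some t => some ((q.1, (t.1 : Int)), valTok (rowOf g q.1) t.1 t.2)
            | none => d.get? q
          else d.get? q := by
      by_cases hqi : q.1 = i
      · subst hqi
        rw [pvIndexRow_get?]
        cases hf : (tokensFrom (rowOf g q.1) 0).find? (tokPred q) with
        | none => simp [hf]
        | some t => simp [hf]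
      · rw [pvIndexRow_get?]
        cases hf : (tokensFrom (rowOf g i) 0).find? (tokPred q) with
        | none => simp [hf, hqi]
        | some t => simp [hf, hqi]
    by_cases hin : q.1 ∈ is
    · rw [if_pos hin, if_pos (List.mem_cons_of_mem _ hin)]
      cases hf : (tokensFrom (rowOf g q.1) 0).find? (tokPred q) with
      | none =>
        simp only [hf]
        rw [hone]
        simp only [hf]
        by_cases hqi : q.1 = i <;> simp [hqi]
      | some t => simp only [hf]
    · rw [if_neg hin, hone]
      by_cases hqi : q.1 = i
      · rw [if_pos hqi, if_pos (by rw [hqi]; exact List.mem_cons_self ..)]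
      · rw [if_neg hqi, if_neg ?_]
        intro hc
        rcases List.mem_cons.mp hc with hc | hc
        · exact hqi hc
        · exact hin hc

theorem cellTokF_get? (g : List String) (q : Int × Int) :
    (cellTokF g).get? q = (tokAt g q).map (fun t => (idOf t, tokVal g t)) := by
  unfold cellTokF
  rw [PySem.List.enumerate_eq_map_pyRange (d := ""), List.foldl_map]
  have : ∀ (d : CellTok),
      ((PySem.List.pyRange 0 (PySem.List.len g) 1).foldl
        (fun d i => pvIndexRow i ((PySem.List.pyGetD g i "").toList) 0 d) d)
      = ((PySem.List.pyRange 0 (PySem.List.len g) 1).foldl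
        (fun d i => pvIndexRow i (rowOf g i) 0 d) d) := fun d => rfl
  rw [this, rowsIdx_get?]
  unfold tokAt
  by_cases hin : q.1 ∈ PySem.List.pyRange 0 (PySem.List.len g) 1
  · rw [PySem.List.mem_pyRange_one] at hin
    rw [if_pos (by rw [PySem.List.mem_pyRange_one]; exact hin), if_pos hin]
    cases hf : (tokensFrom (rowOf g q.1) 0).find? (tokPred q) with
    | none => simp
    | some t =>
      simp [idOf, tokVal]
  · rw [if_neg hin, if_neg (by rw [← PySem.List.mem_pyRange_one] at *; exact hin)]
    simp

-- ---------- B: the 8-neighbourhood and the dedup fold ----------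
def N9 (i j : Int) : List (Int × Int) :=
  ([-1, 0, 1] : List Int).flatMap (fun di => ([-1, 0, 1] : List Int).map (fun dj => (i + di, j + dj)))

theorem mem_N9 (i j : Int) (c : Int × Int) :
    c ∈ N9 i j ↔ i - 1 ≤ c.1 ∧ c.1 ≤ i + 1 ∧ j - 1 ≤ c.2 ∧ c.2 ≤ j + 1 := by
  unfold N9
  rw [List.mem_flatMap]
  constructor
  · rintro ⟨di, hdi, hc⟩
    rw [List.mem_map] at hc
    obtain ⟨dj, hdj, rfl⟩ := hc
    simp only [List.mem_cons, List.not_mem_nil, or_false] at hdi hdj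
    dsimp only
    rcases hdi with rfl|rfl|rfl <;> rcases hdj with rfl|rfl|rfl <;> omega
  · rintro ⟨h1, h2, h3, h4⟩
    refine ⟨c.1 - i, ?_, ?_⟩
    · simp only [List.mem_cons, List.not_mem_nil, or_false]
      omega
    · rw [List.mem_map]
      refine ⟨c.2 - j, ?_, ?_⟩
      · simp only [List.mem_cons, List.not_mem_nil, or_false]
        omega
      · obtain ⟨a, b⟩ := c
        dsimp only
        rw [Prod.mk.injEq]
        omega

theorem foldl_opt {α β γ : Type} (l : List α) (F : α → Option β) (f : γ → β → γ) (init : γ) :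
    l.foldl (fun acc a => match F a with | some t => f acc t | none => acc) init
      = (l.filterMap F).foldl f init := by
  induction l generalizing init with
  | nil => rfl
  | cons a l ih =>
    cases h : F a <;> simp [h, ih]

def srcList (g : List String) (q : Int × Int) : List ((Int × Int) × Int) :=
  (N9 q.1 q.2).filterMap (fun c => (cellTokF g).get? c)

theorem pvNbrIds_eq (g : List String) (i j : Int) :
    pvNbrIds (cellTokF g) i j = (srcList g (i, j)).foldl
      (fun ids t => if ids.all (fun u => t.1 != u.1) then ids ++ [t] else ids) [] := by
  unfold srcList N9
  rw [← foldl_opt, List.foldl_flatMap]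
  unfold pvNbrIds
  refine PySem.List.foldl_congr_mem _ _ _ _ ?_
  intro acc di _
  rw [List.foldl_map]
  refine PySem.List.foldl_congr_mem _ _ _ _ ?_
  intro acc2 dj _
  dsimp only
  cases h : PySem.Dict.get? (cellTokF g) (i + di, j + dj) with
  | none => simp [h]
  | some t => simp [h]

theorem dedup_fold_update (L0 : List ((Int × Int) × Int))
    (hkey : ∀ a ∈ L0, ∀ b ∈ L0, a.1 = b.1 → a = b) :
    ∀ (L : List ((Int × Int) × Int)), (∀ u ∈ L, u ∈ L0) →
    ∀ (acc : List ((Int × Int) × Int)), (∀ u ∈ acc, u ∈ L0) →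
    L.foldl (fun ids t => if ids.all (fun u => t.1 != u.1) then ids ++ [t] else ids) acc
      = PySem.Set.update acc L := by
  intro L
  induction L with
  | nil =>
    intro _ acc _
    rfl
  | cons t L ih =>
    intro hL acc hacc
    rw [List.foldl_cons, PySem.Set.update_cons]
    have hstep : (if acc.all (fun u => t.1 != u.1) then acc ++ [t] else acc)
        = PySem.Set.add acc t := by
      by_cases hm : t ∈ acc
      · have hall : acc.all (fun u => t.1 != u.1) = false := by
          rw [List.all_eq_false]
          exact ⟨t, hm, by simp⟩
        rw [PySem.Set.add_of_mem hm, hall]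
        simp
      · have hall : acc.all (fun u => t.1 != u.1) = true := by
          rw [List.all_eq_true]
          intro u hu
          simp only [bne_iff_ne, ne_eq]
          intro hkeq
          apply hm
          rw [hkey t (hL t (List.mem_cons_self ..)) u (hacc u hu) hkeq]
          exact hu
        rw [PySem.Set.add_of_not_mem hm, hall]
        simp
    rw [hstep]
    refine ih (fun u hu => hL u (List.mem_cons_of_mem _ hu)) _ ?_
    intro u hu
    rw [PySem.Set.mem_add] at hu
    rcases hu with hu | rfl
    · exact hacc u hu
    · exact hL u (List.mem_cons_self ..)

theorem mem_srcList (g : List String) (q : Int × Int) (u : (Int × Int) × Int) :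
    u ∈ srcList g q ↔ ∃ t, t ∈ allToks g ∧ inRectB q t = true ∧ u = (idOf t, tokVal g t) := by
  unfold srcList
  rw [List.mem_filterMap]
  constructor
  · rintro ⟨c, hc, hg⟩
    rw [cellTokF_get?, Option.map_eq_some_iff] at hg
    obtain ⟨t, hta, rfl⟩ := hg
    obtain ⟨hmem, h1, h2, h3⟩ := (tokAt_eq_some_iff g c t).mp hta
    refine ⟨t, hmem, ?_, rfl⟩
    rw [mem_N9] at hc
    unfold inRectB
    simp only [Bool.and_eq_true, decide_eq_true_eq]
    omega
  · rintro ⟨t, hmem, hrect, rfl⟩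
    obtain ⟨ha, hb, hc⟩ := (mem_allToks g t).mp hmem
    have hbt := tokensFrom_bounds (rowOf g t.1) 0 t.2 hc
    unfold inRectB at hrect
    simp only [Bool.and_eq_true, decide_eq_true_eq] at hrect
    have hse : (t.2.1 : Int) < (t.2.2 : Int) := by exact_mod_cast hbt.2.1
    refine ⟨(t.1, if q.2 < (t.2.1 : Int) then (t.2.1 : Int)
      else if (t.2.2 : Int) ≤ q.2 then (t.2.2 : Int) - 1 else q.2), ?_, ?_⟩
    · rw [mem_N9]
      dsimp only
      split_ifs <;> omega
    · rw [cellTokF_get?]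
      have : tokAt g (t.1, if q.2 < (t.2.1 : Int) then (t.2.1 : Int)
          else if (t.2.2 : Int) ≤ q.2 then (t.2.2 : Int) - 1 else q.2) = some t := by
        rw [tokAt_eq_some_iff]
        refine ⟨hmem, rfl, ?_, ?_⟩ <;> dsimp only <;> split_ifs <;> omega
      rw [this]
      rfl

def pairsOf (g : List String) (l : List Tok) : List ((Int × Int) × Int) :=
  l.map (fun t => (idOf t, tokVal g t))

theorem srcList_key (g : List String) (q : Int × Int) :
    ∀ a ∈ srcList g q, ∀ b ∈ srcList g q, a.1 = b.1 → a = b := by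
  intro a ha b hb hk
  obtain ⟨t, ht, _, rfl⟩ := (mem_srcList g q a).mp ha
  obtain ⟨u, hu, _, rfl⟩ := (mem_srcList g q b).mp hb
  dsimp only at hk
  rw [idOf_inj g t u ht hu hk]

theorem ids_eq_ofList (g : List String) (q : Int × Int) :
    pvNbrIds (cellTokF g) q.1 q.2 = PySem.Set.ofList (srcList g q) := by
  rw [show pvNbrIds (cellTokF g) q.1 q.2 = pvNbrIds (cellTokF g) (q.1, q.2).1 (q.1, q.2).2
      from rfl, pvNbrIds_eq]
  rw [dedup_fold_update (srcList g (q.1, q.2)) (srcList_key g (q.1, q.2)) _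
    (fun u hu => hu) [] (by intro u hu; cases hu)]
  rfl

theorem ids_perm (g : List String) (q : Int × Int) :
    (pvNbrIds (cellTokF g) q.1 q.2).Perm (pairsOf g (adjToks g q)) := by
  rw [ids_eq_ofList]
  have hnd1 : (PySem.Set.ofList (srcList g q)).Nodup := PySem.Set.nodup_ofList _
  have hnd2 : (pairsOf g (adjToks g q)).Nodup := by
    unfold pairsOf
    refine List.Nodup.map_on ?_ ((nodup_allToks g).filter _)
    intro t ht u hu he
    exact idOf_inj g t u (List.mem_of_mem_filter ht) (List.mem_of_mem_filter hu)
      (by have := congrArg Prod.fst he; simpa using this)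
  rw [List.perm_ext_iff_of_nodup hnd1 hnd2]
  intro u
  rw [PySem.Set.mem_ofList, mem_srcList]
  unfold pairsOf
  rw [List.mem_map]
  constructor
  · rintro ⟨t, hmem, hrect, rfl⟩
    exact ⟨t, List.mem_filter.mpr ⟨hmem, hrect⟩, rfl⟩
  · rintro ⟨t, hmem, rfl⟩
    exact ⟨t, (List.mem_filter.mp hmem).1, (List.mem_filter.mp hmem).2, rfl⟩

theorem twoProdSnd (l : List ((Int × Int) × Int)) (h : l.length = 2) :
    (PySem.List.pyGetD l 0 ((0, 0), 0)).2 * (PySem.List.pyGetD l 1 ((0, 0), 0)).2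
      = (l.map (fun u => u.2)).prod := by
  obtain ⟨a, b, rfl⟩ := List.length_eq_two.mp h
  simp [PySem.List.pyGetD]

-- ---------- B: invariant of the symbol-cell scan ----------
def BInv (g : List String) (ql : List (Int × Int)) (st : Int × Int × PySem.Set (Int × Int)) : Prop :=
  ∃ ts : List Tok, ts.Nodup ∧ (∀ t ∈ ts, t ∈ allToks g) ∧
    st.2.2 = ts.map idOf ∧ st.1 = (ts.map (tokVal g)).sum ∧
    (∀ t ∈ allToks g, (t ∈ ts ↔ ∃ q ∈ ql, inRectB q t = true)) ∧
    st.2.1 = (ql.map (gTerm g)).sum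

theorem seenFold (g : List String) (q : Int × Int) (L : List ((Int × Int) × Int))
    (hL : ∀ u ∈ L, ∃ t, t ∈ allToks g ∧ inRectB q t = true ∧ u = (idOf t, tokVal g t)) :
    ∀ (ts : List Tok) (p2 : Int), ts.Nodup → (∀ t ∈ ts, t ∈ allToks g) →
    ∃ ts' : List Tok, ts'.Nodup ∧ (∀ t ∈ ts', t ∈ allToks g) ∧
      L.foldl (fun st u => if PySem.Set.contains st.2.2 u.1 then st
          else (st.1 + u.2, st.2.1, PySem.Set.add st.2.2 u.1))
        ((ts.map (tokVal g)).sum, p2, ts.map idOf)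
        = ((ts'.map (tokVal g)).sum, p2, ts'.map idOf) ∧
      (∀ t ∈ allToks g, (t ∈ ts' ↔ t ∈ ts ∨ ∃ u ∈ L, u.1 = idOf t)) := by
  induction L with
  | nil =>
    intro ts p2 h1 h2
    exact ⟨ts, h1, h2, rfl, fun t ht => by simp⟩
  | cons u L ih =>
    intro ts p2 h1 h2
    obtain ⟨t0, ht0a, ht0r, rfl⟩ := hL u (List.mem_cons_self ..)
    rw [List.foldl_cons]
    by_cases hm : idOf t0 ∈ ts.map idOf
    · have ht0ts : t0 ∈ ts := by
        obtain ⟨t1, ht1, he⟩ := List.mem_map.mp hm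
        rw [← idOf_inj g t1 t0 (h2 t1 ht1) ht0a he]
        exact ht1
      have hcont : PySem.Set.contains (ts.map idOf) (idOf t0) = true := by
        rw [PySem.Set.contains_iff]
        exact hm
      rw [if_pos (by exact hcont)]
      obtain ⟨ts', n1, n2, hfold, hmem⟩ :=
        ih (fun v hv => hL v (List.mem_cons_of_mem _ hv)) ts p2 h1 h2
      refine ⟨ts', n1, n2, hfold, ?_⟩
      intro t ht
      rw [hmem t ht]
      constructor
      · rintro (h | ⟨v, hv, he⟩)
        · exact Or.inl h
        · exact Or.inr ⟨v, List.mem_cons_of_mem _ hv, he⟩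
      · rintro (h | ⟨v, hv, he⟩)
        · exact Or.inl h
        · rcases List.mem_cons.mp hv with rfl | hv'
          · left
            dsimp only at he
            rw [← idOf_inj g t t0 ht ht0a he.symm] at ht0ts
            exact ht0ts
          · exact Or.inr ⟨v, hv', he⟩
    · have ht0nin : t0 ∉ ts := fun hc => hm (List.mem_map_of_mem hc)
      have hcont : PySem.Set.contains (ts.map idOf) (idOf t0) = false := by
        cases hb : PySem.Set.contains (ts.map idOf) (idOf t0)
        · rfl
        · rw [PySem.Set.contains_iff] at hb
          exact absurd hb hm
      rw [if_neg (by rw [hcont]; exact Bool.false_ne_true)]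
      have hadd : PySem.Set.add (ts.map idOf) (idOf t0) = (ts ++ [t0]).map idOf := by
        rw [PySem.Set.add_of_not_mem hm, List.map_append]
        rfl
      have hsum : (ts.map (tokVal g)).sum + tokVal g t0 = ((ts ++ [t0]).map (tokVal g)).sum := by
        rw [List.map_append, List.sum_append]
        simp
      have hnd : (ts ++ [t0]).Nodup := by
        rw [List.nodup_append]
        refine ⟨h1, List.nodup_singleton _, ?_⟩
        intro x hx y hy
        have hxe : y = t0 := List.mem_singleton.mp hy
        subst hxe
        intro he
        subst he
        exact ht0nin hx
      have hsub : ∀ t ∈ ts ++ [t0], t ∈ allToks g := by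
        intro t ht
        rcases List.mem_append.mp ht with ht | ht
        · exact h2 t ht
        · rw [List.mem_singleton.mp ht]
          exact ht0a
      obtain ⟨ts', n1, n2, hfold, hmem⟩ :=
        ih (fun v hv => hL v (List.mem_cons_of_mem _ hv)) (ts ++ [t0]) p2 hnd hsub
      refine ⟨ts', n1, n2, ?_, ?_⟩
      · dsimp only
        rw [hadd, hsum, hfold]
      · intro t ht
        rw [hmem t ht]
        constructor
        · rintro (h | ⟨v, hv, he⟩)
          · rcases List.mem_append.mp h with h | h
            · exact Or.inl h
            · right
              refine ⟨(idOf t0, tokVal g t0), List.mem_cons_self .., ?_⟩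
              rw [List.mem_singleton.mp h]
          · exact Or.inr ⟨v, List.mem_cons_of_mem _ hv, he⟩
        · rintro (h | ⟨v, hv, he⟩)
          · exact Or.inl (List.mem_append_left _ h)
          · rcases List.mem_cons.mp hv with rfl | hv'
            · left
              apply List.mem_append_right
              dsimp only at he
              rw [← idOf_inj g t t0 ht ht0a he.symm]
              exact List.mem_singleton_self _
            · exact Or.inr ⟨v, hv', he⟩

theorem hitSym_iff (g : List String) (t : Tok) :
    hitSym g t = true ↔ ∃ q ∈ symCells g, inRectB q t = true := by
  unfold hitSym
  rw [List.any_eq_true]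
  constructor
  · rintro ⟨q, hqr, hqs⟩
    refine ⟨q, ?_, (mem_rect_iff_inRectB t q).mp hqr⟩
    rw [symCells, List.mem_filter]
    obtain ⟨a, b, c, d, _⟩ := (symAt_iff g q.1 q.2).mp hqs
    exact ⟨(mem_cellsZ g q).mpr ⟨a, b, c, d⟩, hqs⟩
  · rintro ⟨q, hqs, hqr⟩
    exact ⟨q, (mem_rect_iff_inRectB t q).mpr hqr, (List.mem_filter.mp hqs).2⟩

theorem symBody_inv (g : List String) (q : Int × Int) (hq : q ∈ symCells g)
    (ql : List (Int × Int)) (st : Int × Int × PySem.Set (Int × Int)) (h : BInv g ql st) :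
    BInv g (ql ++ [q]) (pvSymBody (cellTokF g) q.1 q.2
      (PySem.List.pyGetD (rowOf g q.1) q.2 ' ') st) := by
  obtain ⟨ts, h1, h2, h3, h4, h5, h6⟩ := h
  have hst : st = ((ts.map (tokVal g)).sum, (ql.map (gTerm g)).sum, ts.map idOf) := by
    obtain ⟨a, b, c⟩ := st
    dsimp only at h3 h4 h6
    rw [h3, h4, h6]
  rw [hst]
  unfold pvSymBody
  have hperm : (pvNbrIds (cellTokF g) q.1 q.2).Perm (pairsOf g (adjToks g q)) := ids_perm g q
  have hL : ∀ u ∈ pvNbrIds (cellTokF g) q.1 q.2,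
      ∃ t, t ∈ allToks g ∧ inRectB q t = true ∧ u = (idOf t, tokVal g t) := by
    intro u hu
    have hu' := hperm.mem_iff.mp hu
    unfold pairsOf at hu'
    rw [List.mem_map] at hu'
    obtain ⟨t, htm, rfl⟩ := hu'
    exact ⟨t, (List.mem_filter.mp htm).1, (List.mem_filter.mp htm).2, rfl⟩
  obtain ⟨ts', n1, n2, hfold, hmem⟩ := seenFold g q (pvNbrIds (cellTokF g) q.1 q.2) hL ts
    ((ql.map (gTerm g)).sum) h1 h2
  simp only [hfold]
  have hlen : (pvNbrIds (cellTokF g) q.1 q.2).length = (adjToks g q).length := by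
    rw [hperm.length_eq]
    unfold pairsOf
    rw [List.length_map]
  have hsy : symAt g q.1 q.2 = true := (List.mem_filter.mp hq).2
  obtain ⟨a, b, c, d, e⟩ := (symAt_iff g q.1 q.2).mp hsy
  have hchar : (PySem.List.pyGetD (rowOf g q.1) q.2 ' ' == '*') = starAt g q.1 q.2 := by
    unfold starAt
    simp only [PySem.List.len_eq] at b d
    simp [a, b, c, d, PySem.List.len_eq]
  have hlenb : (PySem.List.len (pvNbrIds (cellTokF g) q.1 q.2) == 2)
      = ((adjToks g q).length == 2) := by
    rw [PySem.List.len_eq, hlen]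
    by_cases h2' : (adjToks g q).length = 2 <;> simp [h2'] <;> omega
  have hmem' : ∀ t ∈ allToks g, (t ∈ ts' ↔ t ∈ ts ∨ inRectB q t = true) := by
    intro t ht
    rw [hmem t ht]
    constructor
    · rintro (h | ⟨u, hu, he⟩)
      · exact Or.inl h
      · obtain ⟨t1, ht1a, ht1r, rfl⟩ := hL u hu
        dsimp only at he
        rw [← idOf_inj g t1 t ht1a ht he]
        exact Or.inr ht1r
    · rintro (h | h)
      · exact Or.inl h
      · right
        refine ⟨(idOf t, tokVal g t), ?_, rfl⟩
        rw [hperm.mem_iff]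
        unfold pairsOf
        rw [List.mem_map]
        exact ⟨t, List.mem_filter.mpr ⟨ht, h⟩, rfl⟩
  have hmemF : ∀ t ∈ allToks g, (t ∈ ts' ↔ ∃ q' ∈ ql ++ [q], inRectB q' t = true) := by
    intro t ht
    rw [hmem' t ht, h5 t ht]
    constructor
    · rintro (⟨q', hq', hr⟩ | h)
      · exact ⟨q', List.mem_append_left _ hq', hr⟩
      · exact ⟨q, List.mem_append_right _ (List.mem_singleton_self _), h⟩
    · rintro ⟨q', hq', hr⟩
      rcases List.mem_append.mp hq' with hq' | hq'
      · exact Or.inl ⟨q', hq', hr⟩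
      · rw [List.mem_singleton.mp hq'] at hr
        exact Or.inr hr
  have hterm : (if (PySem.List.pyGetD (rowOf g q.1) q.2 ' ' == '*'
        && PySem.List.len (pvNbrIds (cellTokF g) q.1 q.2) == 2) = true then
      (PySem.List.pyGetD (pvNbrIds (cellTokF g) q.1 q.2) 0 ((0, 0), 0)).2
        * (PySem.List.pyGetD (pvNbrIds (cellTokF g) q.1 q.2) 1 ((0, 0), 0)).2
    else 0) = gTerm g q := by
    rw [hchar, hlenb]
    unfold gTerm
    by_cases hc : (starAt g q.1 q.2 && ((adjToks g q).length == 2)) = true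
    · rw [if_pos hc, if_pos hc]
      have hl2 : (pvNbrIds (cellTokF g) q.1 q.2).length = 2 := by
        rw [hlen]
        have := (Bool.and_eq_true _ _).mp hc
        simpa using this.2
      rw [twoProdSnd _ hl2]
      have : ((pvNbrIds (cellTokF g) q.1 q.2).map (fun u => u.2)).prod
          = ((pairsOf g (adjToks g q)).map (fun u => u.2)).prod :=
        (hperm.map (fun u => u.2)).prod_eq
      rw [this]
      unfold pairsOf
      rw [List.map_map]
      rfl
    · have hc' : (starAt g q.1 q.2 && ((adjToks g q).length == 2)) = false := by simpa using hc
      rw [if_neg (by simp [hc']), if_neg (by simp [hc'])]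
  by_cases hbr : (PySem.List.pyGetD (rowOf g q.1) q.2 ' ' == '*'
      && PySem.List.len (pvNbrIds (cellTokF g) q.1 q.2) == 2) = true
  · rw [if_pos hbr]
    refine ⟨ts', n1, n2, rfl, rfl, hmemF, ?_⟩
    dsimp only
    rw [List.map_append, List.sum_append]
    simp only [List.map_cons, List.map_nil, List.sum_cons, List.sum_nil, add_zero]
    rw [← hterm, if_pos hbr]
  · rw [if_neg hbr]
    refine ⟨ts', n1, n2, rfl, rfl, hmemF, ?_⟩
    dsimp only
    rw [List.map_append, List.sum_append]
    simp only [List.map_cons, List.map_nil, List.sum_cons, List.sum_nil, add_zero]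
    rw [← hterm, if_neg hbr]
    simp

theorem symFold_inv (g : List String) (qs : List (Int × Int)) :
    ∀ (ql : List (Int × Int)) (st : Int × Int × PySem.Set (Int × Int)),
      (∀ q ∈ qs, q ∈ symCells g) → BInv g ql st →
      BInv g (ql ++ qs) (qs.foldl (fun st q => pvSymBody (cellTokF g) q.1 q.2
        (PySem.List.pyGetD (rowOf g q.1) q.2 ' ') st) st) := by
  induction qs with
  | nil => intro ql st _ h; simpa using h
  | cons q qs ih =>
    intro ql st hqs h
    rw [List.foldl_cons]
    have h1 := symBody_inv g q (hqs q (List.mem_cons_self ..)) ql st h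
    have h2 := ih (ql ++ [q]) _ (fun q' hq' => hqs q' (List.mem_cons_of_mem _ hq')) h1
    simpa using h2

-- B's closed form
theorem sum_gTerm_symCells (g : List String) :
    ((symCells g).map (gTerm g)).sum = ((cellsZ g).map (gTerm g)).sum := by
  unfold symCells
  rw [sum_map_filter_eq]
  congr 1
  apply List.map_congr_left
  intro q hq
  by_cases hs : symAt g q.1 q.2 = true
  · rw [if_pos hs]
  · rw [if_neg hs, gTerm_eq_zero_of_not_symAt g q (by simpa using hs)]

theorem solveB_closed (g : List String) :
    solve_alt g = ((((allToks g).filter (hitSym g)).map (tokVal g)).sum,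
                   ((cellsZ g).map (gTerm g)).sum) := by
  have hct : (PySem.List.enumerate g).foldl
      (fun d p => pvIndexRow p.1 p.2.toList 0 d) PySem.Dict.empty = cellTokF g := rfl
  have hgrid : (PySem.List.enumerate g).foldl
      (fun (st : Int × Int × PySem.Set (Int × Int)) p =>
        (PySem.List.enumerate p.2.toList).foldl (fun st q =>
          if q.2 != '.' && !(PySem.Chars.isdigit q.2) then pvSymBody (cellTokF g) p.1 q.1 q.2 st
          else st) st) (0, 0, PySem.Set.empty)
      = (symCells g).foldl (fun st q => pvSymBody (cellTokF g) q.1 q.2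
          (PySem.List.pyGetD (rowOf g q.1) q.2 ' ') st) (0, 0, PySem.Set.empty) := by
    rw [PySem.List.enumerate_eq_map_pyRange (d := ""), List.foldl_map]
    refine (PySem.List.foldl_congr_mem _ _ (fun (st : Int × Int × PySem.Set (Int × Int)) i =>
        (PySem.List.pyRange 0 (PySem.List.len (rowOf g i)) 1).foldl (fun st j =>
          if symAt g i j = true then pvSymBody (cellTokF g) i j
            (PySem.List.pyGetD (rowOf g i) j ' ') st else st) st) _ ?_).trans ?_
    · intro st i hi
      rw [PySem.List.mem_pyRange_one] at hi
      dsimp only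
      rw [PySem.List.enumerate_eq_map_pyRange (d := ' '), List.foldl_map]
      refine PySem.List.foldl_congr_mem _ _ _ _ ?_
      intro acc j hj
      rw [PySem.List.mem_pyRange_one] at hj
      have hj' : 0 ≤ j ∧ j < PySem.List.len (rowOf g i) := hj
      dsimp only
      rw [symB_def]
      have hcond : symB (PySem.List.pyGetD ((PySem.List.pyGetD g i "").toList) j ' ')
          = symAt g i j := by
        show symB (PySem.List.pyGetD (rowOf g i) j ' ') = symAt g i j
        unfold symAt
        simp only [PySem.List.len_eq] at hi hj'
        simp [hi.1, hi.2, hj'.1, hj'.2, PySem.List.len_eq]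
      rw [hcond]
      rfl
    · have h2 : (PySem.List.pyRange 0 (PySem.List.len g) 1).foldl
          (fun (st : Int × Int × PySem.Set (Int × Int)) i =>
            (PySem.List.pyRange 0 (PySem.List.len (rowOf g i)) 1).foldl
              (fun st j => if symAt g i j = true then pvSymBody (cellTokF g) i j
                (PySem.List.pyGetD (rowOf g i) j ' ') st else st) st) (0, 0, PySem.Set.empty)
          = (cellsZ g).foldl (fun st q => if symAt g q.1 q.2 = true then
              pvSymBody (cellTokF g) q.1 q.2 (PySem.List.pyGetD (rowOf g q.1) q.2 ' ') st
              else st) (0, 0, PySem.Set.empty) := by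
        unfold cellsZ
        rw [List.foldl_flatMap]
        refine (PySem.List.foldl_congr_mem _ _ _ _ ?_).symm
        intro st i _
        rw [List.foldl_map]
      rw [h2, PySem.List.foldl_ite_eq_foldl_filter]
      have hfe : (fun x : Int × Int => decide (symAt g x.1 x.2 = true))
          = fun x : Int × Int => symAt g x.1 x.2 := by
        funext x
        cases hx : symAt g x.1 x.2 <;> simp [hx]
      rw [hfe]
      rfl
  have hinv0 : BInv g [] ((0 : Int), (0 : Int), (PySem.Set.empty : PySem.Set (Int × Int))) := by
    refine ⟨[], List.nodup_nil, ?_, rfl, rfl, ?_, rfl⟩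
    · intro t ht
      cases ht
    · intro t _
      simp
  have hinv := symFold_inv g (symCells g) [] _ (fun q hq => hq) hinv0
  rw [List.nil_append] at hinv
  obtain ⟨ts, n1, n2, h3, h4, h5, h6⟩ := hinv
  unfold solve_alt
  simp only
  rw [hct, hgrid]
  refine Prod.ext ?_ ?_
  · rw [h4]
    have hpm : ts.Perm ((allToks g).filter (hitSym g)) := by
      rw [List.perm_ext_iff_of_nodup n1 ((nodup_allToks g).filter _)]
      intro t
      constructor
      · intro ht
        have hta := n2 t ht
        refine List.mem_filter.mpr ⟨hta, ?_⟩
        rw [hitSym_iff]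
        exact (h5 t hta).mp ht
      · intro ht
        obtain ⟨hta, hh⟩ := List.mem_filter.mp ht
        exact (h5 t hta).mpr ((hitSym_iff g t).mp hh)
    exact (hpm.map (tokVal g)).sum_eq
  · rw [h6]
    exact sum_gTerm_symCells g

-- ===== VERDICT (by name: the statement is the Claim_ definition above) =====
theorem solve_spec : Claim_equal_solve := by
  intro g _
  unfold Spec_solve
  rw [solveA_closed, solveB_closed]
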